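-- pv_equiv track=rewrite | github.com/zoedolan/Vybn | Vybn_Mind/spark_infrastructure/repo_proprioception.py | _homology
-- ===== SOURCE A (Python) =====
-- def _z2_rank(matrix, nrows, ncols):
--     if nrows == 0 or ncols == 0:
--         return 0
--     M = [row[:] for row in matrix]
--     pivot_row = 0
--     for col in range(ncols):
--         found = -1
--         for row in range(pivot_row, nrows):
--             if M[row][col] == 1:
--                 found = row
--                 break
--         if found == -1:
--             continue
--         M[pivot_row], M[found] = M[found], M[pivot_row]
--         for row in range(nrows):
--             if row != pivot_row and M[row][col] == 1:
--                 for c in range(ncols):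
--                     M[row][c] ^= M[pivot_row][c]
--         pivot_row += 1
--     return pivot_row
--
-- def _homology(n_verts, edges, triangles):
--     nV, nE, nT = n_verts, len(edges), len(triangles)
--     e_idx = {e: i for i, e in enumerate(edges)}
--
--     d1 = [[0] * nE for _ in range(nV)]
--     for j, (u, v) in enumerate(edges):
--         d1[u][j] = 1
--         d1[v][j] = 1
--
--     d2 = [[0] * nT for _ in range(nE)]
--     for j, (a, b, c) in enumerate(triangles):
--         for edge in [(min(a, b), max(a, b)), (min(a, c), max(a, c)), (min(b, c), max(b, c))]:
--             if edge in e_idx: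
--                 d2[e_idx[edge]][j] = 1
--
--     rank_d1 = _z2_rank(d1, nV, nE)
--     rank_d2 = _z2_rank(d2, nE, nT)
--
--     b_0 = nV - rank_d1
--     b_1 = (nE - rank_d1) - rank_d2
--     return b_0, b_1
-- ===== SOURCE B (Python) =====
-- def _inc_rank(vecs):
--     # incremental GF(2) rank of a list of bitmask vectors, via a reduced pivot basis
--     pivots = {}
--     rank = 0
--     for vec in vecs:
--         while vec:
--             b = vec.bit_length() - 1
--             if b in pivots:
--                 vec ^= pivots[b]
--             else:
--                 pivots[b] = vec
--                 rank += 1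
--                 break
--     return rank
--
-- def _homology(n_verts, edges, triangles):
--     nV, nE = n_verts, len(edges)
--     e_idx = {e: i for i, e in enumerate(edges)}
--     d1_cols = [(1 << u) | (1 << v) for (u, v) in edges]
--     d2_cols = []
--     for (a, b, c) in triangles:
--         vec = 0
--         for edge in [(min(a, b), max(a, b)), (min(a, c), max(a, c)), (min(b, c), max(b, c))]:
--             if edge in e_idx:
--                 vec |= 1 << e_idx[edge]
--         d2_cols.append(vec)
--     rank_d1 = _inc_rank(d1_cols)
--     rank_d2 = _inc_rank(d2_cols)
--     b_0 = nV - rank_d1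
--     b_1 = (nE - rank_d1) - rank_d2
--     return b_0, b_1
-- ===== Notes on version B (the rewrite author's own statement) =====
-- stated objective: faster
-- what changed: B never builds the boundary matrices: it computes each GF(2) rank in one pass over the edge/triangle column bitmasks with an incremental reduced pivot basis, instead of A's dense row-swapping Gaussian elimination over explicit nV*nE and nE*nT matrices.
-- outside the precondition, e.g. on _homology(2, [(-1, 0)], []): A returns (1, 0), B raises ValueError
import Mathlib
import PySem

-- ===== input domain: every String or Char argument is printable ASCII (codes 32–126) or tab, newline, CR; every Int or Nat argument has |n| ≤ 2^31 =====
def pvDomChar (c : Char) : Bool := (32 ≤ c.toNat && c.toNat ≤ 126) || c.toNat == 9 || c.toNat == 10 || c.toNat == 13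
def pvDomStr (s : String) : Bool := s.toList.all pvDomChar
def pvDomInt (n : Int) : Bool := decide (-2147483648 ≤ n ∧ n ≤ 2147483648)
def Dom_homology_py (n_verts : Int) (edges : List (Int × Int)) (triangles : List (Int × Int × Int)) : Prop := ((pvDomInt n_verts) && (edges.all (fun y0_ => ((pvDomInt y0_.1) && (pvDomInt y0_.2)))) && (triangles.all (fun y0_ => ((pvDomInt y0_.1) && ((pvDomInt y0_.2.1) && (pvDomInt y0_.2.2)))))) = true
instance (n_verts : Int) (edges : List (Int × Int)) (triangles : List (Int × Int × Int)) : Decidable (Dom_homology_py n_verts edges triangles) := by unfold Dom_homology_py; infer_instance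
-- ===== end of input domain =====

-- B computes the two GF(2) ranks in one pass over column bitmasks with an incremental reduced
-- pivot basis, never building A's dense boundary matrices (measured faster; asymptotic mechanism).


-- ===== PORT A =====
-- M[r][c]; in every call made under Pre_ the indices are in range, so the defaults are never used
def pvGet2 (M : List (List Int)) (r c : Int) : Int :=
  PySem.List.pyGetD (PySem.List.pyGetD M r []) c 0

-- M[r][c] = x; r and c are nonnegative and in range in every call made under Pre_
def pvSet2 (M : List (List Int)) (r c : Int) (x : Int) : List (List Int) :=
  M.set r.toNat ((PySem.List.pyGetD M r []).set c.toNat x)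

-- 'found = -1; for row in range(pivot_row, nrows): if M[row][col] == 1: found = row; break'
def pvFindPivot (M : List (List Int)) (col : Int) : List Int → Int
  | [] => -1
  | r :: rs => if pvGet2 M r col == 1 then r else pvFindPivot M col rs

-- 'for c in range(ncols): M[row][c] ^= M[pivot_row][c]'  (pr is the pivot row, a distinct row)
def pvXorRow (row pr : List Int) (ncols : Int) : List Int :=
  (PySem.List.pyRange 0 ncols 1).foldl
    (fun acc c => acc.set c.toNat (PySem.Int.bxor (PySem.List.pyGetD acc c 0) (PySem.List.pyGetD pr c 0))) row

-- one iteration of A's 'for col in range(ncols)' loop, state (M, pivot_row)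
def pvElimCol (nrows ncols : Int) (st : List (List Int) × Int) (col : Int) : List (List Int) × Int :=
  let M := st.1
  let p := st.2
  let found := pvFindPivot M col (PySem.List.pyRange p nrows 1)
  if found == -1 then st
  else
    let M1 := (M.set p.toNat (PySem.List.pyGetD M found [])).set found.toNat (PySem.List.pyGetD M p [])
    let M2 := (PySem.List.pyRange 0 nrows 1).foldl
      (fun Mc r => if r != p && (pvGet2 Mc r col == 1)
                   then Mc.set r.toNat (pvXorRow (PySem.List.pyGetD Mc r []) (PySem.List.pyGetD Mc p []) ncols)
                   else Mc) M1
    (M2, p + 1)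

def pvZ2Rank (matrix : List (List Int)) (nrows ncols : Int) : Int :=
  if nrows == 0 || ncols == 0 then 0
  else ((PySem.List.pyRange 0 ncols 1).foldl (pvElimCol nrows ncols) (matrix, 0)).2

-- 'e_idx = {e: i for i, e in enumerate(edges)}'
def pvEIdx (edges : List (Int × Int)) : PySem.Dict (Int × Int) Int :=
  (PySem.List.enumerate edges 0).foldl (fun d ie => d.insert ie.2 ie.1) PySem.Dict.empty

def pvZeros (nr nc : Int) : List (List Int) :=
  List.replicate nr.toNat (List.replicate nc.toNat 0)

def pvBuildD1 (nV nE : Int) (edges : List (Int × Int)) : List (List Int) :=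
  (PySem.List.enumerate edges 0).foldl
    (fun M je => pvSet2 (pvSet2 M je.2.1 je.1 1) je.2.2 je.1 1) (pvZeros nV nE)

def pvTriEdges (a b c : Int) : List (Int × Int) :=
  [(min a b, max a b), (min a c, max a c), (min b c, max b c)]

def pvBuildD2 (nE nT : Int) (eIdx : PySem.Dict (Int × Int) Int) (triangles : List (Int × Int × Int)) : List (List Int) :=
  (PySem.List.enumerate triangles 0).foldl
    (fun M jt =>
      (pvTriEdges jt.2.1 jt.2.2.1 jt.2.2.2).foldl
        (fun Mc e => if eIdx.contains e then pvSet2 Mc (eIdx.getD e 0) jt.1 1 else Mc) M)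
    (pvZeros nE nT)

def homology_py (n_verts : Int) (edges : List (Int × Int)) (triangles : List (Int × Int × Int)) : Int × Int :=
  let nV := n_verts
  let nE : Int := edges.length
  let nT : Int := triangles.length
  let eIdx := pvEIdx edges
  let d1 := pvBuildD1 nV nE edges
  let d2 := pvBuildD2 nE nT eIdx triangles
  let rank_d1 := pvZ2Rank d1 nV nE
  let rank_d2 := pvZ2Rank d2 nE nT
  (nV - rank_d1, (nE - rank_d1) - rank_d2)

-- ===== PORT B =====
-- the 'while vec:' reduction loop of _inc_rank; 'fuel' is a totality guard only: every xor with
-- the stored pivot cancels vec's leading bit, so 'vec' iterations always suffice (proved below)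
def altReduceF (piv : PySem.Dict Int Nat) (rank : Int) : Nat → Nat → PySem.Dict Int Nat × Int
  | 0, _ => (piv, rank)
  | fuel + 1, vec =>
    if vec = 0 then (piv, rank)
    else
      let b : Int := PySem.Int.bitLength (vec : Int) - 1
      match piv.get? b with
      | some pv => altReduceF piv rank fuel (vec ^^^ pv)
      | none => (piv.insert b vec, rank + 1)

def altReduce (piv : PySem.Dict Int Nat) (rank : Int) (vec : Nat) : PySem.Dict Int Nat × Int :=
  altReduceF piv rank vec vec

def altRank (vecs : List Nat) : Int :=
  (vecs.foldl (fun st v => altReduce st.1 st.2 v) (PySem.Dict.empty, 0)).2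

-- Source B builds the same 'e_idx = {e: i for i, e in enumerate(edges)}'
def altEIdx (edges : List (Int × Int)) : PySem.Dict (Int × Int) Int :=
  (PySem.List.enumerate edges 0).foldl (fun d ie => d.insert ie.2 ie.1) PySem.Dict.empty

-- one triangle's boundary bitmask (the '.toNat' on the stored index is exact: indices are ≥ 0)
def altTriVec (eIdx : PySem.Dict (Int × Int) Int) (a b c : Int) : Nat :=
  [(min a b, max a b), (min a c, max a c), (min b c, max b c)].foldl
    (fun vec e => if eIdx.contains e then vec ||| (1 <<< (eIdx.getD e 0).toNat) else vec) 0

def homology_py_alt (n_verts : Int) (edges : List (Int × Int)) (triangles : List (Int × Int × Int)) : Int × Int :=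
  let nV := n_verts
  let nE : Int := edges.length
  let eIdx := altEIdx edges
  -- '(1 << u) | (1 << v)'; '.toNat' is exact under Pre_ (0 ≤ u, v)
  let d1cols := edges.map (fun e => (1 <<< e.1.toNat) ||| (1 <<< e.2.toNat))
  let d2cols := triangles.map (fun t => altTriVec eIdx t.1 t.2.1 t.2.2)
  let rank_d1 := altRank d1cols
  let rank_d2 := altRank d2cols
  (nV - rank_d1, (nE - rank_d1) - rank_d2)

-- ===== PRECONDITION & SPEC =====
-- Pre_ excludes edges with an endpoint outside [0, n_verts): for an endpoint < -n_verts or ≥ n_verts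
-- A raises IndexError, and for a negative endpoint in [-n_verts, 0) A's value comes from Python's
-- accidental negative-index wraparound into the incidence matrix, where B's left shift raises ValueError.
def Pre_homology_py (n_verts : Int) (edges : List (Int × Int)) (triangles : List (Int × Int × Int)) : Prop :=
  ∀ e ∈ edges, 0 ≤ e.1 ∧ e.1 < n_verts ∧ 0 ≤ e.2 ∧ e.2 < n_verts

instance (n_verts : Int) (edges : List (Int × Int)) (triangles : List (Int × Int × Int)) : Decidable (Pre_homology_py n_verts edges triangles) := by unfold Pre_homology_py; infer_instance

def pvWitness_homology_py : Int × (List (Int × Int)) × (List (Int × Int × Int)) :=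
  (3, [(0, 1), (1, 2), (0, 2)], [(0, 1, 2)])

def Spec_homology_py (n_verts : Int) (edges : List (Int × Int)) (triangles : List (Int × Int × Int)) (out : Int × Int) : Prop := out = homology_py_alt n_verts edges triangles
instance (n_verts : Int) (edges : List (Int × Int)) (triangles : List (Int × Int × Int)) (out : Int × Int) : Decidable (Spec_homology_py n_verts edges triangles out) := by unfold Spec_homology_py; infer_instance

-- ===== CLAIM (what is proved, stated in full; the proofs are below) =====
def Claim_equal_homology_py : Prop := ∀ (n_verts : Int) (edges : List (Int × Int)) (triangles : List (Int × Int × Int)), Dom_homology_py n_verts edges triangles → Pre_homology_py n_verts edges triangles → Spec_homology_py n_verts edges triangles (homology_py n_verts edges triangles)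

-- ===== LEMMAS AND PROOFS =====

-- ---- generic list-update helpers ----
theorem getD_set' {α : Type} (l : List α) (i : Nat) (v d : α) (j : Nat) :
    (l.set i v).getD j d = if j = i ∧ i < l.length then v else l.getD j d := by
  rcases Nat.lt_or_ge i l.length with hi | hi
  · rw [List.getD_eq_getElem?_getD, List.getD_eq_getElem?_getD, List.getElem?_set]
    by_cases hij : i = j
    · subst hij
      simp [hi, List.getElem?_eq_getElem hi]
    · have hne : ¬(j = i ∧ i < l.length) := fun h => hij h.1.symm
      simp [hij, hne]
  · rw [List.set_eq_of_length_le (by omega)]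
    have hne : ¬(j = i ∧ i < l.length) := by rintro ⟨rfl, h⟩; omega
    simp [hne]

-- ---- Nat bit helpers ----
theorem shift_eq_pow (i : Nat) : (1 <<< i : Nat) = 2 ^ i := Nat.one_shiftLeft i

theorem testBit_pow (i j : Nat) : ((2:Nat) ^ i).testBit j = decide (i = j) := by
  by_cases h : i = j
  · subst h; simp [Nat.testBit_two_pow_self]
  · simp [Nat.testBit_two_pow_of_ne h, h]

theorem testBit_log2 (x : Nat) (hx : x ≠ 0) : x.testBit x.log2 = true := by
  have h1 : x / 2 ^ x.log2 = 1 :=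
    Nat.div_eq_of_lt_le (by simpa using Nat.log2_self_le hx)
      (by have hlt := Nat.lt_log2_self (n := x); rw [Nat.pow_succ] at hlt; omega)
  simp [Nat.testBit, Nat.shiftRight_eq_div_pow, h1]

theorem testBit_false_of_log2_lt {x j : Nat} (h : x.log2 < j) (hx : x ≠ 0) : x.testBit j = false := by
  exact Nat.testBit_lt_two_pow
    (lt_of_lt_of_le Nat.lt_log2_self (Nat.pow_le_pow_right (by norm_num) h))

theorem log2_eq_iff_top {x t : Nat} (h1 : 2 ^ t ≤ x) (h2 : x < 2 ^ (t + 1)) : x.log2 = t := by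
  have hx : x ≠ 0 := by have := Nat.two_pow_pos t; omega
  have hub : x.log2 < t + 1 := (Nat.log2_lt hx).mpr h2
  have hlb : t ≤ x.log2 := (Nat.le_log2 hx).mpr h1
  omega

theorem xor_top_lt {a b : Nat} (ha : a ≠ 0) (hb : b ≠ 0) (h : a.log2 = b.log2) :
    a ^^^ b < 2 ^ a.log2 := by
  apply Nat.lt_pow_two_of_testBit
  intro j hj
  rw [Nat.testBit_xor]
  rcases eq_or_lt_of_le hj with rfl | hlt
  · rw [testBit_log2 a ha]
    rw [show a.log2 = b.log2 from h, testBit_log2 b hb]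
    rfl
  · rw [testBit_false_of_log2_lt hlt ha, testBit_false_of_log2_lt (h ▸ hlt) hb]
    rfl

theorem xor_top_ne {a b : Nat} (ha : a ≠ 0) (hb : b ≠ 0) (h : b.log2 < a.log2) :
    a ^^^ b ≠ 0 ∧ (a ^^^ b).log2 = a.log2 := by
  have hbt : b.testBit a.log2 = false := testBit_false_of_log2_lt h hb
  have hat : a.testBit a.log2 = true := testBit_log2 a ha
  have hxt : (a ^^^ b).testBit a.log2 = true := by
    rw [Nat.testBit_xor, hat, hbt]; rfl
  constructor
  · intro h0; rw [h0] at hxt; simp [Nat.zero_testBit] at hxt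
  · apply log2_eq_iff_top
    · exact Nat.ge_two_pow_of_testBit hxt
    · exact Nat.xor_lt_two_pow Nat.lt_log2_self
        (lt_of_lt_of_le Nat.lt_log2_self (Nat.pow_le_pow_right (by norm_num) (by omega)))

-- ---- GF(2) span of a list of bitmask vectors ----
inductive XSpan : List Nat → Nat → Prop
  | zero (vs) : XSpan vs 0
  | xor (vs v w) : v ∈ vs → XSpan vs w → XSpan vs (v ^^^ w)

theorem XSpan.single {vs : List Nat} {v : Nat} (h : v ∈ vs) : XSpan vs v := by
  have h0 := XSpan.xor vs v 0 h (XSpan.zero vs)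
  simpa using h0

theorem XSpan.add {vs : List Nat} {x y : Nat} (h1 : XSpan vs x) (h2 : XSpan vs y) :
    XSpan vs (x ^^^ y) := by
  induction h1 with
  | zero => simpa using h2
  | xor v w hv _ ih => rw [Nat.xor_assoc]; exact XSpan.xor _ v _ hv ih

theorem XSpan.trans {vs ws : List Nat} {x : Nat} (h : ∀ v ∈ vs, XSpan ws v) (hx : XSpan vs x) :
    XSpan ws x := by
  induction hx with
  | zero => exact XSpan.zero ws
  | xor v w hv _ ih => exact XSpan.add (h v hv) ih

theorem XSpan.congr {vs ws : List Nat} (h : ∀ v, v ∈ vs ↔ v ∈ ws) (x : Nat) :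
    XSpan vs x ↔ XSpan ws x :=
  ⟨XSpan.trans (fun v hv => XSpan.single ((h v).mp hv)),
   XSpan.trans (fun v hv => XSpan.single ((h v).mpr hv))⟩

theorem XSpan.cons_of_mem {vs : List Nat} {v : Nat} (h : XSpan vs v) (x : Nat) :
    XSpan (v :: vs) x ↔ XSpan vs x := by
  constructor
  · refine XSpan.trans ?_
    intro u hu
    rcases List.mem_cons.mp hu with rfl | hu'
    · exact h
    · exact XSpan.single hu'
  · exact XSpan.trans fun u hu => XSpan.single (List.mem_cons_of_mem _ hu)

theorem XSpan.cons_congr {vs ws : List Nat} (h : ∀ x, XSpan vs x ↔ XSpan ws x) (a x : Nat) :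
    XSpan (a :: vs) x ↔ XSpan (a :: ws) x := by
  constructor
  · refine XSpan.trans ?_
    intro u hu
    rcases List.mem_cons.mp hu with rfl | hu'
    · exact XSpan.single (by simp)
    · exact XSpan.trans (fun w hw => XSpan.single (by simp [hw])) ((h u).mp (XSpan.single hu'))
  · refine XSpan.trans ?_
    intro u hu
    rcases List.mem_cons.mp hu with rfl | hu'
    · exact XSpan.single (by simp)
    · exact XSpan.trans (fun w hw => XSpan.single (by simp [hw])) ((h u).mpr (XSpan.single hu'))

theorem XSpan.lt {vs : List Nat} {p : Nat} (hp : ∀ v ∈ vs, v < 2 ^ p) {x : Nat}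
    (h : XSpan vs x) : x < 2 ^ p := by
  induction h with
  | zero => exact Nat.two_pow_pos p
  | xor v w hv _ ih => exact Nat.xor_lt_two_pow (hp v hv) ih

theorem XSpan.map {vs : List Nat} {x : Nat} {L : Nat → Nat}
    (hL : ∀ a b, L (a ^^^ b) = L a ^^^ L b) (h : XSpan vs x) : XSpan (vs.map L) (L x) := by
  have hL0 : L 0 = 0 := by
    have h00 := hL 0 0
    simp only [Nat.xor_zero] at h00
    rw [Nat.xor_self] at h00
    exact h00
  induction h with
  | zero => rw [hL0]; exact XSpan.zero _
  | xor v w hv _ ih => rw [hL]; exact XSpan.xor _ _ _ (List.mem_map_of_mem hv) ih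

theorem XSpan.of_lt_units {vs : List Nat} {p : Nat} (hcs : ∀ i < p, (2 ^ i : Nat) ∈ vs) :
    ∀ x, x < 2 ^ p → XSpan vs x := by
  intro x
  induction x using Nat.strong_induction_on with
  | _ x ih =>
    intro hx
    rcases Nat.eq_zero_or_pos x with rfl | hpos
    · exact XSpan.zero vs
    have hxne : x ≠ 0 := by omega
    have ht : x.log2 < p := by
      have h2 := Nat.log2_self_le hxne
      by_contra hc
      push_neg at hc
      have hpp : (2:Nat) ^ p ≤ 2 ^ x.log2 := Nat.pow_le_pow_right (by norm_num) hc
      omega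
    have hy : x ^^^ 2 ^ x.log2 < 2 ^ x.log2 :=
      xor_top_lt hxne (by positivity) (by rw [Nat.log2_two_pow])
    have hlt2 : x ^^^ 2 ^ x.log2 < x := lt_of_lt_of_le hy (Nat.log2_self_le hxne)
    have hsp := ih _ hlt2 (lt_of_lt_of_le hy (Nat.pow_le_pow_right (by norm_num) (le_of_lt ht)))
    have hxeq : (2 ^ x.log2) ^^^ (x ^^^ 2 ^ x.log2) = x := by
      rw [Nat.xor_comm x, ← Nat.xor_assoc, Nat.xor_self, Nat.zero_xor]
    exact hxeq ▸ XSpan.xor vs _ _ (hcs _ ht) hsp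

def xorSum (l : List Nat) : Nat := l.foldr (· ^^^ ·) 0

theorem xorSum_perm {l l' : List Nat} (h : l.Perm l') : xorSum l = xorSum l' := by
  induction h with
  | nil => rfl
  | cons x _ ih => simp only [xorSum, List.foldr_cons] at *; rw [ih]
  | swap x y l =>
    simp only [xorSum, List.foldr_cons]
    rw [← Nat.xor_assoc, ← Nat.xor_assoc, Nat.xor_comm x y]
  | trans _ _ ih1 ih2 => rw [ih1, ih2]

theorem XSpan.iff_xorSum {vs : List Nat} {x : Nat} :
    XSpan vs x ↔ ∃ us : List Nat, us.Nodup ∧ (∀ u ∈ us, u ∈ vs) ∧ xorSum us = x := by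
  constructor
  · intro h
    induction h with
    | zero => exact ⟨[], by simp [xorSum]⟩
    | xor v w hv _ ih =>
      obtain ⟨us, hnd, hsub, hsum⟩ := ih
      by_cases hvus : v ∈ us
      · refine ⟨us.erase v, hnd.erase _, fun u hu => hsub u (List.mem_of_mem_erase hu), ?_⟩
        have hperm : us.Perm (v :: us.erase v) := List.perm_cons_erase hvus
        have hx : xorSum us = v ^^^ xorSum (us.erase v) := by
          rw [xorSum_perm hperm]; rfl
        rw [← hsum, hx, ← Nat.xor_assoc, Nat.xor_self, Nat.zero_xor]
      · refine ⟨v :: us, List.nodup_cons.mpr ⟨hvus, hnd⟩, ?_, ?_⟩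
        · intro u hu
          rcases List.mem_cons.mp hu with rfl | h'
          · exact hv
          · exact hsub _ h'
        · simp only [xorSum, List.foldr_cons] at *; rw [hsum]
  · rintro ⟨us, hnd0, hsub, rfl⟩
    clear hnd0
    induction us with
    | nil => exact XSpan.zero _
    | cons u us ih =>
      exact XSpan.xor _ _ _ (hsub u (by simp))
        (ih (fun x hx => hsub x (by simp [hx])))

theorem xorSum_top {us : List Nat} (hpos : ∀ u ∈ us, 0 < u)
    (hpw : us.Pairwise (fun a b => a.log2 ≠ b.log2)) (hne : us ≠ []) :
    xorSum us ≠ 0 ∧ ∃ u ∈ us, (xorSum us).log2 = u.log2 := by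
  induction us with
  | nil => exact absurd rfl hne
  | cons u us ih =>
    rcases List.pairwise_cons.mp hpw with ⟨hhead, htail⟩
    have hupos : 0 < u := hpos u (by simp)
    match us, ih with
    | [], _ =>
      refine ⟨by simpa [xorSum] using hupos.ne', u, by simp, by simp [xorSum]⟩
    | u2 :: us2, ih =>
      obtain ⟨hyne, u', hu', hy'⟩ :=
        ih (fun x hx => hpos x (by simp [hx])) htail (by simp)
      set y := xorSum (u2 :: us2) with hy
      have hne2 : u.log2 ≠ y.log2 := by rw [hy']; exact hhead u' hu'
      have hxs : xorSum (u :: u2 :: us2) = u ^^^ y := rfl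
      rcases lt_or_gt_of_ne hne2 with hlt | hgt
      · have := xor_top_ne hyne hupos.ne' hlt
        rw [Nat.xor_comm y u] at this
        exact ⟨by rw [hxs]; exact this.1, u', by simp [hu'],
          by rw [hxs, this.2, hy']⟩
      · have := xor_top_ne hupos.ne' hyne hgt
        exact ⟨by rw [hxs]; exact this.1, u, by simp, by rw [hxs, this.2]⟩

theorem span_top_bit {vs : List Nat} {x : Nat} (hpos : ∀ v ∈ vs, 0 < v)
    (hnd : (vs.map Nat.log2).Nodup) (hx : XSpan vs x) (hxne : x ≠ 0) :
    ∃ v ∈ vs, v.log2 = x.log2 := by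
  obtain ⟨us, hndus, hsub, hsum⟩ := XSpan.iff_xorSum.mp hx
  have husne : us ≠ [] := by rintro rfl; exact hxne hsum.symm
  have hvspw : vs.Pairwise (fun a b => a.log2 ≠ b.log2) := List.pairwise_map.mp hnd
  have hforall : ∀ a ∈ vs, ∀ b ∈ vs, a ≠ b → a.log2 ≠ b.log2 :=
    fun a ha b hb hab => hvspw.forall (fun _ _ h => h.symm) ha hb hab
  have huspw : us.Pairwise (fun a b => a.log2 ≠ b.log2) :=
    hndus.imp_of_mem (fun {a b} ha hb hab => hforall a (hsub a ha) b (hsub b hb) hab)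
  obtain ⟨_, u, hu, hlog⟩ := xorSum_top (fun u hu => hpos u (hsub u hu)) huspw husne
  exact ⟨u, hsub u hu, by rw [← hsum, hlog]⟩

theorem nat_xor_left_comm (a b c : Nat) : a ^^^ (b ^^^ c) = b ^^^ (a ^^^ c) := by
  rw [← Nat.xor_assoc, Nat.xor_comm a b, Nat.xor_assoc]

theorem xor_left_cancel (a b : Nat) : a ^^^ (a ^^^ b) = b := by
  rw [← Nat.xor_assoc, Nat.xor_self, Nat.zero_xor]

theorem XSpan.xor_mem_iff {vs : List Nat} {pv v : Nat} (hpv : pv ∈ vs) :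
    XSpan vs (v ^^^ pv) ↔ XSpan vs v := by
  constructor
  · intro h
    have h2 := XSpan.add h (XSpan.single hpv)
    rwa [Nat.xor_xor_cancel_right] at h2
  · intro h; exact XSpan.add h (XSpan.single hpv)

theorem XSpan.cons_xor {vs : List Nat} {pv v : Nat} (hpv : pv ∈ vs) (x : Nat) :
    XSpan ((v ^^^ pv) :: vs) x ↔ XSpan (v :: vs) x := by
  constructor
  · refine XSpan.trans ?_
    intro u hu
    rcases List.mem_cons.mp hu with rfl | hu'
    · exact XSpan.add (XSpan.single (by simp)) (XSpan.single (by simp [hpv]))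
    · exact XSpan.single (by simp [hu'])
  · refine XSpan.trans ?_
    intro u hu
    rcases List.mem_cons.mp hu with rfl | hu'
    · rw [show u = (u ^^^ pv) ^^^ pv from (Nat.xor_xor_cancel_right u pv).symm]
      exact XSpan.add (XSpan.single (by simp)) (XSpan.single (by simp [hpv]))
    · exact XSpan.single (by simp [hu'])

-- ---- B side: the pivot dictionary invariant and the reduce-loop spec ----
def PivInv (piv : PySem.Dict Int Nat) : Prop :=
  piv.keys.Nodup ∧ ∀ q ∈ piv.items, 0 < q.2 ∧ q.1 = (q.2.log2 : Int)

theorem pivValues_pos {piv : PySem.Dict Int Nat} (h : PivInv piv) : ∀ v ∈ piv.values, 0 < v := by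
  intro v hv
  simp only [PySem.Dict.values] at hv
  obtain ⟨q, hq, rfl⟩ := List.mem_map.mp hv
  exact (h.2 q hq).1

theorem pivValues_nodup_log2 {piv : PySem.Dict Int Nat} (h : PivInv piv) :
    (piv.values.map Nat.log2).Nodup := by
  have hmaps : (piv.values.map Nat.log2).map (fun n : Nat => (n : Int)) = piv.keys := by
    simp only [PySem.Dict.values, PySem.Dict.keys, List.map_map]
    exact List.map_congr_left (fun q hq => ((h.2 q hq).2).symm)
  have hk := h.1
  rw [← hmaps] at hk
  exact hk.of_map

theorem bitLength_cast (v : Nat) (hv : v ≠ 0) :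
    PySem.Int.bitLength (v : Int) = v.log2 + 1 := by
  induction v using Nat.strong_induction_on with
  | _ v ih =>
    rcases Nat.lt_or_ge v 2 with h2 | h2
    · have hv1 : v = 1 := by omega
      subst hv1; decide
    · have hv2 : v / 2 ≠ 0 := by omega
      have hs1 := Nat.log2_self_le hv2
      have hs2 := Nat.lt_log2_self (n := v / 2)
      have hlog : v.log2 = (v / 2).log2 + 1 := by
        apply log2_eq_iff_top
        · rw [Nat.pow_succ]; omega
        · rw [Nat.pow_succ, Nat.pow_succ]; omega
      rw [PySem.Int.bitLength_natCast (by omega), ih (v / 2) (by omega) hv2, hlog]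

theorem altReduce_spec : ∀ (vec : Nat) (fuel : Nat), vec ≤ fuel →
    ∀ (piv : PySem.Dict Int Nat) (rank : Int), PivInv piv →
    ∃ piv' rank', altReduceF piv rank fuel vec = (piv', rank') ∧ PivInv piv' ∧
      (∀ x, XSpan piv'.values x ↔ XSpan (vec :: piv.values) x) ∧
      ((XSpan piv.values vec ∧ piv' = piv ∧ rank' = rank) ∨
       (¬ XSpan piv.values vec ∧ rank' = rank + 1)) := by
  intro vec
  induction vec using Nat.strong_induction_on with
  | _ vec ih =>
    intro fuel hfuel piv rank hpiv
    rcases Nat.eq_zero_or_pos vec with rfl | hpos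
    · refine ⟨piv, rank, ?_, hpiv, ?_, Or.inl ⟨XSpan.zero _, rfl, rfl⟩⟩
      · cases fuel with
        | zero => rfl
        | succ f => simp [altReduceF]
      · intro x; exact (XSpan.cons_of_mem (XSpan.zero _) x).symm
    · have hvne : vec ≠ 0 := by omega
      obtain ⟨f, rfl⟩ : ∃ f, fuel = f + 1 := ⟨fuel - 1, by omega⟩
      have hb : (PySem.Int.bitLength (vec : Int) : Int) - 1 = (vec.log2 : Int) := by
        rw [bitLength_cast vec hvne]; push_cast; ring
      cases hg : piv.get? ((vec.log2 : Int)) with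
      | some pv =>
        have hq : ((vec.log2 : Int), pv) ∈ piv.items := by
          first
            | exact PySem.Dict.mem_items_of_get?_eq_some hg
            | exact PySem.Dict.mem_items_of_get?_eq_some _ hg
            | exact PySem.Dict.mem_items_of_get?_eq_some _ _ hg
            | exact PySem.Dict.mem_items_of_get?_eq_some _ _ _ hg
        obtain ⟨hpvpos, hkey⟩ := hpiv.2 _ hq
        have hlog : vec.log2 = pv.log2 := by
          have h' : ((vec.log2 : Nat) : Int) = ((pv.log2 : Nat) : Int) := hkey
          exact_mod_cast h'
        have hxlt : vec ^^^ pv < 2 ^ vec.log2 := xor_top_lt hvne hpvpos.ne' hlog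
        have hlt : vec ^^^ pv < vec := lt_of_lt_of_le hxlt (Nat.log2_self_le hvne)
        obtain ⟨piv', rank', heq, hpiv', hspan', hcase⟩ :=
          ih (vec ^^^ pv) hlt f (by omega) piv rank hpiv
        have hpv_mem : pv ∈ piv.values := by
          simp only [PySem.Dict.values]
          exact List.mem_map.mpr ⟨_, hq, rfl⟩
        have hstep : altReduceF piv rank (f + 1) vec = altReduceF piv rank f (vec ^^^ pv) := by
          simp only [altReduceF, if_neg hvne, hb, hg]
        refine ⟨piv', rank', hstep ▸ heq, hpiv', ?_, ?_⟩
        · intro x; rw [hspan' x]; exact XSpan.cons_xor hpv_mem x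
        · have hiff : XSpan piv.values (vec ^^^ pv) ↔ XSpan piv.values vec :=
            XSpan.xor_mem_iff hpv_mem
          rcases hcase with ⟨hin, rfl, rfl⟩ | ⟨hnin, hr⟩
          · exact Or.inl ⟨hiff.mp hin, rfl, rfl⟩
          · exact Or.inr ⟨fun hc => hnin (hiff.mpr hc), hr⟩
      | none =>
        have hnc : piv.contains ((vec.log2 : Int)) = false := by
          rw [← PySem.Dict.get?_eq_none_iff_contains]; exact hg
        have hnotin : ¬ XSpan piv.values vec := by
          intro hc
          obtain ⟨v, hv, hlog⟩ :=
            span_top_bit (pivValues_pos hpiv) (pivValues_nodup_log2 hpiv) hc hvne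
          obtain ⟨q, hq, hq2⟩ := List.mem_map.mp (by simpa only [PySem.Dict.values] using hv)
          have hkb : q.1 = ((vec.log2 : Int)) := by
            rw [(hpiv.2 q hq).2, hq2, hlog]
          have hk0 : q.1 ∈ piv.keys := by
            first
              | exact PySem.Dict.mem_keys_of_mem_items hq
              | exact PySem.Dict.mem_keys_of_mem_items _ hq
              | exact PySem.Dict.mem_keys_of_mem_items _ _ hq
          have hk : ((vec.log2 : Int)) ∈ piv.keys := hkb ▸ hk0
          have hcont : piv.contains ((vec.log2 : Int)) = true := by
            first
              | exact (PySem.Dict.contains_iff_mem_keys).mpr hk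
              | exact (PySem.Dict.contains_iff_mem_keys _).mpr hk
              | exact (PySem.Dict.contains_iff_mem_keys _ _).mpr hk
          rw [hnc] at hcont
          exact Bool.noConfusion hcont
        have heval : altReduceF piv rank (f + 1) vec
            = (piv.insert ((vec.log2 : Int)) vec, rank + 1) := by
          simp only [altReduceF, if_neg hvne, hb, hg]
        have hitems : (piv.insert ((vec.log2 : Int)) vec).items
            = piv.items ++ [(((vec.log2 : Int)), vec)] := by
          first
            | exact PySem.Dict.items_insert_of_not_contains hnc
            | exact PySem.Dict.items_insert_of_not_contains _ hnc
            | exact PySem.Dict.items_insert_of_not_contains _ _ hnc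
            | exact PySem.Dict.items_insert_of_not_contains _ _ _ hnc
        have hnodup' : (piv.insert ((vec.log2 : Int)) vec).keys.Nodup := by
          first
            | exact PySem.Dict.nodup_keys_insert hpiv.1
            | exact PySem.Dict.nodup_keys_insert _ hpiv.1
            | exact PySem.Dict.nodup_keys_insert _ _ hpiv.1
            | exact PySem.Dict.nodup_keys_insert _ _ _ hpiv.1
        refine ⟨_, _, heval, ⟨hnodup', ?_⟩, ?_,
          Or.inr ⟨hnotin, rfl⟩⟩
        · intro q hq
          rw [hitems] at hq
          rcases List.mem_append.mp hq with hq' | hq'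
          · exact hpiv.2 q hq'
          · simp only [List.mem_singleton] at hq'
            subst hq'; exact ⟨by omega, rfl⟩
        · intro x
          have hvals : (piv.insert ((vec.log2 : Int)) vec).values = piv.values ++ [vec] := by
            simp only [PySem.Dict.values, hitems, List.map_append]; rfl
          rw [hvals]
          exact XSpan.congr (fun v => by
            simp only [List.mem_append, List.mem_singleton, List.mem_cons]
            tauto) x

-- ---- A side: entries, column masks ----
def entry (M : List (List Int)) (r c : Nat) : Int := (M.getD r []).getD c 0

def colMask (M : List (List Int)) (c : Nat) : Nat :=
  match M with
  | [] => 0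
  | row :: rs => (if row.getD c 0 = 1 then 1 else 0) + 2 * colMask rs c

theorem testBit_colMask (M : List (List Int)) (c r : Nat) :
    (colMask M c).testBit r = decide (entry M r c = 1) := by
  induction M generalizing r with
  | nil => simp [colMask, entry, Nat.zero_testBit]
  | cons row rs ih =>
    cases r with
    | zero =>
      simp only [colMask, entry, List.getD_cons_zero]
      split_ifs with hx
      · have h2 : (1 + 2 * colMask rs c) % 2 = 1 := by omega
        simp [Nat.testBit_zero, h2]
        all_goals rw [← List.getD_eq_getElem?_getD]
        all_goals exact hx
      · have h2 : (0 + 2 * colMask rs c) % 2 = 0 := by omega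
        simp [Nat.testBit_zero, h2]
        all_goals rw [← List.getD_eq_getElem?_getD]
        all_goals exact hx
    | succ r =>
      have hdiv : ((if row.getD c 0 = 1 then 1 else 0) + 2 * colMask rs c) / 2
          = colMask rs c := by split_ifs <;> omega
      have hih := ih r
      simp only [colMask, entry, List.getD_cons_succ] at hih ⊢
      rw [Nat.testBit_add_one, hdiv]
      exact hih

def Good (nc : Nat) (M : List (List Int)) : Prop :=
  ∀ row ∈ M, row.length = nc ∧ ∀ x ∈ row, x = 0 ∨ x = 1

theorem colMask_hi {nc : Nat} {M : List (List Int)} (hg : Good nc M) {c : Nat} (hc : nc ≤ c) :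
    colMask M c = 0 := by
  apply Nat.eq_of_testBit_eq; intro r
  rw [testBit_colMask, Nat.zero_testBit]
  simp only [decide_eq_false_iff_not]
  intro hcon
  unfold entry at hcon
  rcases Nat.lt_or_ge r M.length with hr | hr
  · have hrow : M.getD r [] ∈ M := by
      rw [List.getD_eq_getElem M [] hr]; exact List.getElem_mem hr
    have hlen := (hg _ hrow).1
    rw [List.getD_eq_default _ _ (by omega : (M.getD r []).length ≤ c)] at hcon
    norm_num at hcon
  · rw [List.getD_eq_default _ _ (by omega : M.length ≤ r)] at hcon
    norm_num at hcon

theorem pvGet2_eq (M : List (List Int)) (r c : Int) (hr : 0 ≤ r) (hc : 0 ≤ c) :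
    pvGet2 M r c = entry M r.toNat c.toNat := by
  have hr' : ((r.toNat : Nat) : Int) = r := Int.toNat_of_nonneg hr
  have hc' : ((c.toNat : Nat) : Int) = c := Int.toNat_of_nonneg hc
  rw [pvGet2, ← hr', ← hc', PySem.List.pyGetD_natCast, PySem.List.pyGetD_natCast]
  rfl

-- ---- linear involutions implemented by A's row operations ----
def xorMap (R p : Nat) (x : Nat) : Nat := if x.testBit p then x ^^^ R else x

def swapMap (p f : Nat) (x : Nat) : Nat :=
  if x.testBit p == x.testBit f then x else x ^^^ (2 ^ p ^^^ 2 ^ f)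

theorem xorMap_linear {R p : Nat} (hR : R.testBit p = false) (x y : Nat) :
    xorMap R p (x ^^^ y) = xorMap R p x ^^^ xorMap R p y := by
  simp only [xorMap, Nat.testBit_xor]
  cases hx : x.testBit p <;> cases hy : y.testBit p <;>
    simp [hx, hy, Nat.xor_assoc, Nat.xor_comm, nat_xor_left_comm, xor_left_cancel,
      Nat.xor_self, Nat.xor_zero, Nat.zero_xor]

theorem xorMap_invol {R p : Nat} (hR : R.testBit p = false) (x : Nat) :
    xorMap R p (xorMap R p x) = x := by
  simp only [xorMap]
  cases hx : x.testBit p with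
  | false => simp [hx]
  | true =>
    have h2 : (x ^^^ R).testBit p = true := by rw [Nat.testBit_xor, hx, hR]; rfl
    simp [hx, h2, Nat.xor_xor_cancel_right]

theorem swapMap_linear (p f : Nat) (x y : Nat) :
    swapMap p f (x ^^^ y) = swapMap p f x ^^^ swapMap p f y := by
  by_cases hpf : p = f
  · subst hpf; simp [swapMap]
  · simp only [swapMap, Nat.testBit_xor]
    cases hxp : x.testBit p <;> cases hxf : x.testBit f <;>
      cases hyp : y.testBit p <;> cases hyf : y.testBit f <;>
      simp [hxp, hxf, hyp, hyf, Nat.xor_assoc, Nat.xor_comm, nat_xor_left_comm,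
        xor_left_cancel, Nat.xor_self, Nat.xor_zero, Nat.zero_xor]

theorem swapMap_invol (p f : Nat) (x : Nat) : swapMap p f (swapMap p f x) = x := by
  by_cases hpf : p = f
  · subst hpf; simp [swapMap]
  · have hDp : ((2:Nat) ^ p ^^^ 2 ^ f).testBit p = true := by
      rw [Nat.testBit_xor, testBit_pow, testBit_pow]
      simp [hpf, Ne.symm hpf]
    have hDf : ((2:Nat) ^ p ^^^ 2 ^ f).testBit f = true := by
      rw [Nat.testBit_xor, testBit_pow, testBit_pow]
      simp [hpf, Ne.symm hpf]
    by_cases hcb : (x.testBit p == x.testBit f) = true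
    · simp [swapMap, hcb]
    · have hc : (x.testBit p == x.testBit f) = false := by
        revert hcb; cases (x.testBit p == x.testBit f) <;> simp
      have hyp : (x ^^^ (2 ^ p ^^^ 2 ^ f)).testBit p = !x.testBit p := by
        rw [Nat.testBit_xor, hDp]; cases x.testBit p <;> rfl
      have hyf : (x ^^^ (2 ^ p ^^^ 2 ^ f)).testBit f = !x.testBit f := by
        rw [Nat.testBit_xor, hDf]; cases x.testBit f <;> rfl
      have hc2 : ((x ^^^ (2 ^ p ^^^ 2 ^ f)).testBit p
          == (x ^^^ (2 ^ p ^^^ 2 ^ f)).testBit f) = false := by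
        rw [hyp, hyf]
        revert hc
        cases x.testBit p <;> cases x.testBit f <;> simp
      have e1 : swapMap p f x = x ^^^ (2 ^ p ^^^ 2 ^ f) := by
        unfold swapMap; rw [hc]; simp
      have e2 : swapMap p f (x ^^^ (2 ^ p ^^^ 2 ^ f))
          = (x ^^^ (2 ^ p ^^^ 2 ^ f)) ^^^ (2 ^ p ^^^ 2 ^ f) := by
        unfold swapMap; rw [hc2]; simp
      rw [e1, e2, Nat.xor_xor_cancel_right]

theorem xorMap_lo {R p x : Nat} (h : x.testBit p = false) : xorMap R p x = x := by
  simp [xorMap, h]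

theorem swapMap_lo {p f x : Nat} (hp : x.testBit p = false) (hf : x.testBit f = false) :
    swapMap p f x = x := by
  simp [swapMap, hp, hf]

-- ---- A's elimination step, entry level ----
theorem swap_getD (M : List (List Int)) (p f : Nat) (hp : p < M.length) (hf : f < M.length)
    (r : Nat) :
    (((M.set p (M.getD f [])).set f (M.getD p [])).getD r []) =
      if r = f then M.getD p [] else if r = p then M.getD f [] else M.getD r [] := by
  rw [getD_set', getD_set']
  simp only [List.length_set]
  by_cases hrf : r = f
  · simp [hrf, hf]
  · by_cases hrp : r = p
    · simp [hrf, hrp, hp, hf]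
    · simp [hrf, hrp]

theorem foldl_set_length (l : List Int) (g : List Int → Int → Int) (is : List Int) :
    (is.foldl (fun acc c => acc.set c.toNat (g acc c)) l).length = l.length := by
  induction is generalizing l with
  | nil => rfl
  | cons c cs ih => rw [List.foldl_cons, ih, List.length_set]

theorem pvXorRow_getD (row pr : List Int) (m : Nat) (hm : m ≤ row.length) :
    ∀ c : Nat, (pvXorRow row pr (m : Int)).getD c 0 =
      if c < m then PySem.Int.bxor (row.getD c 0) (pr.getD c 0) else row.getD c 0 := by
  induction m with
  | zero =>
    intro c
    simp only [pvXorRow, Nat.cast_zero, PySem.List.pyRange_one_eq_nil (le_refl (0:Int)),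
      List.foldl_nil]
    simp
  | succ m ih =>
    intro c
    have h0m : (0:Int) ≤ (m:Int) := by positivity
    have hsr : PySem.List.pyRange 0 ((m+1 : Nat) : Int) 1
        = PySem.List.pyRange 0 (m : Int) 1 ++ [(m : Int)] := by
      push_cast
      exact PySem.List.pyRange_one_succ_right h0m
    have ihm := ih (by omega)
    simp only [pvXorRow] at ihm ⊢
    rw [hsr, List.foldl_append, List.foldl_cons, List.foldl_nil]
    set prev := (PySem.List.pyRange 0 (m : Int) 1).foldl
      (fun acc c => acc.set c.toNat
        (PySem.Int.bxor (PySem.List.pyGetD acc c 0) (PySem.List.pyGetD pr c 0))) row with hprev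
    have hlen : prev.length = row.length := foldl_set_length row _ _
    have hgm : PySem.List.pyGetD prev (m : Int) 0 = row.getD m 0 := by
      rw [PySem.List.pyGetD_natCast, ihm m]
      simp
    rw [Int.toNat_natCast, getD_set', hlen, hgm, PySem.List.pyGetD_natCast]
    by_cases hc : c = m
    · subst hc
      rw [if_pos ⟨rfl, by omega⟩, if_pos (by omega)]
    · rw [if_neg (by tauto), ihm c]
      by_cases hcm : c < m
      · rw [if_pos hcm, if_pos (by omega)]
      · rw [if_neg hcm, if_neg (by omega)]

theorem pvXorRow_length (row pr : List Int) (n : Int) :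
    (pvXorRow row pr n).length = row.length := by
  simp only [pvXorRow]
  exact foldl_set_length row _ _

theorem foldl_ite_set_length (g : List (List Int) → Int → List Int)
    (q : List (List Int) → Int → Bool) (is : List Int) :
    ∀ M : List (List Int),
      ((is.foldl (fun Mc r' => if q Mc r' then Mc.set r'.toNat (g Mc r') else Mc) M).length
        = M.length) := by
  induction is with
  | nil => intro M; rfl
  | cons a l ih =>
    intro M
    rw [List.foldl_cons]
    by_cases h : q M a <;> simp [h, ih, List.length_set]

theorem elimRows_length (M1 : List (List Int)) (p : Nat) (col ncols : Int) (m : Nat) :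
    ((PySem.List.pyRange 0 (m : Int) 1).foldl
      (fun Mc r' => if r' != (p : Int) && (pvGet2 Mc r' col == 1)
                    then Mc.set r'.toNat (pvXorRow (PySem.List.pyGetD Mc r' [])
                           (PySem.List.pyGetD Mc (p : Int) []) ncols)
                    else Mc) M1).length = M1.length :=
  foldl_ite_set_length _ _ _ M1

theorem elimRows_getD (M1 : List (List Int)) (p : Nat) (col ncols : Int) (m : Nat)
    (hm : m ≤ M1.length) :
    ∀ r : Nat, ((PySem.List.pyRange 0 (m : Int) 1).foldl
      (fun Mc r' => if r' != (p : Int) && (pvGet2 Mc r' col == 1)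
                    then Mc.set r'.toNat (pvXorRow (PySem.List.pyGetD Mc r' [])
                           (PySem.List.pyGetD Mc (p : Int) []) ncols)
                    else Mc) M1).getD r [] =
      if r < m ∧ r ≠ p ∧ pvGet2 M1 (r : Int) col = 1
      then pvXorRow (M1.getD r []) (M1.getD p []) ncols
      else M1.getD r [] := by
  induction m with
  | zero =>
    intro r
    rw [show ((0:Nat):Int) = (0:Int) from rfl, PySem.List.pyRange_one_eq_nil (le_refl (0:Int)),
      List.foldl_nil]
    rw [if_neg (by omega)]
  | succ m ih =>
    intro r
    have h0m : (0:Int) ≤ (m:Int) := by positivity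
    have hsr : PySem.List.pyRange 0 ((m+1 : Nat) : Int) 1
        = PySem.List.pyRange 0 (m : Int) 1 ++ [(m : Int)] := by
      push_cast
      exact PySem.List.pyRange_one_succ_right h0m
    have ihm := ih (by omega)
    rw [hsr, List.foldl_append, List.foldl_cons, List.foldl_nil]
    set prev := (PySem.List.pyRange 0 (m : Int) 1).foldl
      (fun Mc r' => if r' != (p : Int) && (pvGet2 Mc r' col == 1)
                    then Mc.set r'.toNat (pvXorRow (PySem.List.pyGetD Mc r' [])
                           (PySem.List.pyGetD Mc (p : Int) []) ncols)
                    else Mc) M1 with hprev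
    have hlenp : prev.length = M1.length := elimRows_length M1 p col ncols m
    have hprevm : prev.getD m [] = M1.getD m [] := by
      rw [ihm m]; simp
    have hprevp : prev.getD p [] = M1.getD p [] := by
      rw [ihm p]; simp
    have hget : pvGet2 prev (m : Int) col = pvGet2 M1 (m : Int) col := by
      simp only [pvGet2, PySem.List.pyGetD_natCast, Int.toNat_natCast]
      rw [hprevm]
    by_cases hcond : m ≠ p ∧ pvGet2 M1 (m : Int) col = 1
    · have hguard : ((m : Int) != (p : Int) && (pvGet2 prev (m : Int) col == 1)) = true := by
        rw [hget]
        simp only [bne, Bool.and_eq_true, Bool.not_eq_true', beq_eq_false_iff_ne,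
          beq_iff_eq]
        exact ⟨by exact_mod_cast hcond.1, hcond.2⟩
      rw [hguard]
      simp only [if_true]
      rw [PySem.List.pyGetD_natCast, PySem.List.pyGetD_natCast, hprevm, hprevp,
        Int.toNat_natCast, getD_set', hlenp]
      by_cases hrm : r = m
      · subst hrm
        rw [if_pos ⟨rfl, by omega⟩, if_pos ⟨by omega, hcond.1, hcond.2⟩]
      · rw [if_neg (by tauto), ihm r]
        by_cases hc2 : r < m ∧ r ≠ p ∧ pvGet2 M1 (r : Int) col = 1
        · rw [if_pos hc2, if_pos ⟨by omega, hc2.2⟩]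
        · rw [if_neg hc2, if_neg (fun h => hc2 ⟨by omega, h.2⟩)]
    · have hguard : ((m : Int) != (p : Int) && (pvGet2 prev (m : Int) col == 1)) = false := by
        rw [hget]
        by_cases hmp : m = p
        · subst hmp; simp
        · have hg1 : (pvGet2 M1 (m : Int) col == 1) = false := by
            simp only [beq_eq_false_iff_ne, ne_eq]
            intro hgg; exact hcond ⟨hmp, hgg⟩
          simp [hg1]
      rw [hguard]
      simp only [Bool.false_eq_true, if_false]
      rw [ihm r]
      by_cases hc2 : r < m ∧ r ≠ p ∧ pvGet2 M1 (r : Int) col = 1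
      · rw [if_pos hc2, if_pos ⟨by omega, hc2.2⟩]
      · rw [if_neg hc2]
        have hnc3 : ¬(r < m + 1 ∧ r ≠ p ∧ pvGet2 M1 (r : Int) col = 1) := by
          rintro ⟨h1, h2x, h3⟩
          rcases Nat.lt_succ_iff_lt_or_eq.mp h1 with h' | h'
          · exact hc2 ⟨h', h2x, h3⟩
          · subst h'
            exact hcond ⟨h2x, h3⟩
        rw [if_neg hnc3]

theorem bxor01 {a b : Int} (ha : a = 0 ∨ a = 1) (hb : b = 0 ∨ b = 1) :
    PySem.Int.bxor a b = if (a = 1) ≠ (b = 1) then 1 else 0 := by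
  rcases ha with rfl | rfl <;> rcases hb with rfl | rfl <;> decide

-- ---- find-pivot characterization ----
theorem findPivot_none (M : List (List Int)) (col : Nat) :
    ∀ (m lo : Nat), (∀ r, lo ≤ r → r < lo + m → entry M r col ≠ 1) →
    pvFindPivot M (col : Int) (PySem.List.pyRange (lo : Int) ((lo + m : Nat) : Int) 1) = -1 := by
  intro m
  induction m with
  | zero =>
    intro lo _
    rw [show ((lo + 0 : Nat) : Int) = (lo : Int) by push_cast; ring,
      PySem.List.pyRange_one_eq_nil (le_refl _)]
    rfl
  | succ m ih =>
    intro lo hno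
    rw [PySem.List.pyRange_one_cons (by push_cast; omega)]
    simp only [pvFindPivot]
    rw [pvGet2_eq M _ _ (by positivity) (by positivity)]
    simp only [Int.toNat_natCast]
    have h0 : entry M lo col ≠ 1 := hno lo (le_refl _) (by omega)
    rw [if_neg (by simpa using h0)]
    have := ih (lo + 1) (fun r h1 h2 => hno r (by omega) (by omega))
    rw [show ((lo : Int) + 1) = ((lo + 1 : Nat) : Int) by push_cast; ring,
      show ((lo + (m+1) : Nat) : Int) = (((lo + 1) + m : Nat) : Int) by push_cast; ring]
    exact this

theorem findPivot_found (M : List (List Int)) (col : Nat) :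
    ∀ (m lo f : Nat), lo ≤ f → f < lo + m → entry M f col = 1 →
    (∀ r, lo ≤ r → r < f → entry M r col ≠ 1) →
    pvFindPivot M (col : Int) (PySem.List.pyRange (lo : Int) ((lo + m : Nat) : Int) 1) = (f : Int) := by
  intro m
  induction m with
  | zero => intro lo f h1 h2; omega
  | succ m ih =>
    intro lo f h1 h2 hf hno
    rw [PySem.List.pyRange_one_cons (by push_cast; omega)]
    simp only [pvFindPivot]
    rw [pvGet2_eq M _ _ (by positivity) (by positivity)]
    simp only [Int.toNat_natCast]
    by_cases hlo : f = lo
    · subst hlo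
      rw [if_pos (by simpa using hf)]
    · rw [if_neg (by simpa using hno lo (le_refl _) (by omega))]
      have := ih (lo + 1) f (by omega) (by omega) hf (fun r ha hb => hno r (by omega) hb)
      rw [show ((lo : Int) + 1) = ((lo + 1 : Nat) : Int) by push_cast; ring,
        show ((lo + (m+1) : Nat) : Int) = (((lo + 1) + m : Nat) : Int) by push_cast; ring]
      exact this

theorem foldl_preserve {α β : Type} (P : α → Prop) (step : α → β → α) (l : List β) :
    ∀ a, (∀ x b, b ∈ l → P x → P (step x b)) → P a → P (l.foldl step a) := by
  induction l with
  | nil => intro a _ h; exact h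
  | cons b bs ih =>
    intro a hstep h
    rw [List.foldl_cons]
    exact ih _ (fun x b' hb' => hstep x b' (by simp [hb'])) (hstep a b (by simp) h)

-- ---- 0/1 entry utilities ----
theorem list01_getD {l : List Int} (h : ∀ x ∈ l, x = 0 ∨ x = 1) (c : Nat) :
    l.getD c 0 = 0 ∨ l.getD c 0 = 1 := by
  rcases Nat.lt_or_ge c l.length with hc | hc
  · rw [List.getD_eq_getElem _ _ hc]; exact h _ (List.getElem_mem hc)
  · rw [List.getD_eq_default _ _ hc]; exact Or.inl rfl

theorem good_row {nc : Nat} {M : List (List Int)} (hg : Good nc M) {r : Nat}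
    (hr : r < M.length) : (M.getD r []).length = nc ∧ ∀ x ∈ M.getD r [], x = 0 ∨ x = 1 := by
  have hrow : M.getD r [] ∈ M := by
    rw [List.getD_eq_getElem M [] hr]; exact List.getElem_mem hr
  exact hg _ hrow

theorem entry01 {nc : Nat} {M : List (List Int)} (hg : Good nc M) (r c : Nat) :
    entry M r c = 0 ∨ entry M r c = 1 := by
  unfold entry
  rcases Nat.lt_or_ge r M.length with hr | hr
  · exact list01_getD (good_row hg hr).2 c
  · rw [List.getD_eq_default _ _ hr]
    exact Or.inl (by simp)

theorem entry_hi {M : List (List Int)} {r : Nat} (hr : M.length ≤ r) (c : Nat) :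
    entry M r c = 0 := by
  unfold entry
  rw [List.getD_eq_default _ _ hr]
  simp

theorem set_row_good {nc : Nat} {M : List (List Int)} (hg : Good nc M) {row : List Int}
    (hlen : row.length = nc) (h01 : ∀ x ∈ row, x = 0 ∨ x = 1) (i : Nat) :
    Good nc (M.set i row) := by
  intro r hr
  rcases List.mem_or_eq_of_mem_set hr with h | h
  · exact hg _ h
  · subst h; exact ⟨hlen, h01⟩

theorem pvXorRow_01 {nc : Nat} {row pr : List Int} (hrl : row.length = nc)
    (hr01 : ∀ x ∈ row, x = 0 ∨ x = 1) (hp01 : ∀ x ∈ pr, x = 0 ∨ x = 1) :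
    ∀ x ∈ pvXorRow row pr (nc : Int), x = 0 ∨ x = 1 := by
  intro x hx
  obtain ⟨i, hi, rfl⟩ := List.mem_iff_getElem.mp hx
  have hleni : (pvXorRow row pr (nc : Int)).length = nc := by rw [pvXorRow_length, hrl]
  have hig : (pvXorRow row pr (nc : Int))[i] = (pvXorRow row pr (nc : Int)).getD i 0 :=
    (List.getD_eq_getElem _ _ hi).symm
  rw [hig, pvXorRow_getD row pr nc (by omega) i, if_pos (by omega : i < nc),
    bxor01 (list01_getD hr01 i) (list01_getD hp01 i)]
  split_ifs
  · exact Or.inr rfl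
  · exact Or.inl rfl

-- ---- bit views of the two row-operation maps ----
theorem swapMap_testBit (p f : Nat) (x : Nat) (r : Nat) :
    (swapMap p f x).testBit r = x.testBit (if r = p then f else if r = f then p else r) := by
  unfold swapMap
  by_cases heq : (x.testBit p == x.testBit f) = true
  · rw [if_pos (by simpa using heq)]
    have hpf : x.testBit p = x.testBit f := by simpa using heq
    by_cases hrp : r = p
    · subst hrp; rw [if_pos rfl, hpf]
    · by_cases hrf : r = f
      · subst hrf; rw [if_neg hrp, if_pos rfl, hpf]
      · rw [if_neg hrp, if_neg hrf]
  · have heq' : (x.testBit p == x.testBit f) = false := by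
      revert heq; cases (x.testBit p == x.testBit f) <;> simp
    rw [if_neg (by simp [heq'])]
    have hne : x.testBit p ≠ x.testBit f := by simpa using heq'
    have hpf : p ≠ f := fun h => hne (h ▸ rfl)
    rw [Nat.testBit_xor, Nat.testBit_xor, testBit_pow, testBit_pow]
    by_cases hrp : r = p
    · subst hrp
      rw [if_pos rfl]
      have h1 : decide (r = r) = true := by simp
      have h2 : decide (f = r) = false := by simp [Ne.symm hpf]
      rw [h1, h2]
      cases hxp : x.testBit r <;> cases hxf : x.testBit f <;> simp_all
    · by_cases hrf : r = f
      · subst hrf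
        rw [if_neg hrp, if_pos rfl]
        have h1 : decide (p = r) = false := by simp [Ne.symm hrp]
        have h2 : decide (r = r) = true := by simp
        rw [h1, h2]
        cases hxp : x.testBit p <;> cases hxf : x.testBit r <;> simp_all
      · rw [if_neg hrp, if_neg hrf]
        have h1 : decide (p = r) = false := by simp [Ne.symm hrp]
        have h2 : decide (f = r) = false := by simp [Ne.symm hrf]
        rw [h1, h2]
        simp

theorem xorMap_testBit (R p : Nat) (x : Nat) (r : Nat) :
    (xorMap R p x).testBit r = ((x.testBit r).xor (x.testBit p && R.testBit r)) := by
  unfold xorMap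
  cases hp : x.testBit p
  · simp [hp]
  · rw [if_pos (by simp [hp]), Nat.testBit_xor, Bool.true_and]

-- ---- the whole elimination step at the column-mask level ----
theorem elim_colMask (M : List (List Int)) (n nc p f k : Nat)
    (hg : Good nc M) (hlen : M.length = n)
    (hpf : p ≤ f) (hf : f < n) (hk : k < nc) (hfk : entry M f k = 1)
    (M2 : List (List Int))
    (hM2 : M2 = (PySem.List.pyRange 0 (n : Int) 1).foldl
      (fun Mc r => if r != (p : Int) && (pvGet2 Mc r (k : Int) == 1)
                   then Mc.set r.toNat (pvXorRow (PySem.List.pyGetD Mc r [])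
                          (PySem.List.pyGetD Mc (p : Int) []) (nc : Int))
                   else Mc)
      ((M.set p (M.getD f [])).set f (M.getD p []))) :
    M2.length = n ∧ Good nc M2 ∧
    (∀ j : Nat, colMask M2 j
        = xorMap (swapMap p f (colMask M k) ^^^ 2 ^ p) p (swapMap p f (colMask M j))) := by
  have hp : p < n := lt_of_le_of_lt hpf hf
  set M1 := (M.set p (M.getD f [])).set f (M.getD p []) with hM1def
  have hM1len : M1.length = n := by rw [hM1def]; simp [hlen]
  have hM1row : ∀ r : Nat, M1.getD r [] =
      if r = f then M.getD p [] else if r = p then M.getD f [] else M.getD r [] :=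
    swap_getD M p f (hlen ▸ hp) (hlen ▸ hf)
  have hM1good : Good nc M1 := by
    rw [hM1def]
    exact set_row_good
      (set_row_good hg (good_row hg (hlen ▸ hf)).1 (good_row hg (hlen ▸ hf)).2 p)
      (good_row hg (hlen ▸ hp)).1 (good_row hg (hlen ▸ hp)).2 f
  have hentry1 : ∀ r c : Nat, entry M1 r c
      = entry M (if r = f then p else if r = p then f else r) c := by
    intro r c
    unfold entry
    rw [hM1row r]
    split_ifs <;> rfl
  have hidx : ∀ r : Nat, (if r = f then p else if r = p then f else r)
      = (if r = p then f else if r = f then p else r) := by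
    intro r
    by_cases h1 : r = p <;> by_cases h2 : r = f <;> simp [h1, h2] <;> omega
  have hcol1 : ∀ j, colMask M1 j = swapMap p f (colMask M j) := by
    intro j
    apply Nat.eq_of_testBit_eq
    intro r
    rw [testBit_colMask, swapMap_testBit, testBit_colMask, hentry1 r j, hidx r]
  have hm1kp : (colMask M1 k).testBit p = true := by
    rw [hcol1, swapMap_testBit, if_pos rfl, testBit_colMask]
    simp [hfk]
  have hpk1 : entry M1 p k = 1 := by
    have h := hm1kp
    rw [testBit_colMask] at h
    simpa using h
  set R := colMask M1 k ^^^ 2 ^ p with hRdef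
  have hRgoal : R = swapMap p f (colMask M k) ^^^ 2 ^ p := by rw [hRdef, hcol1]
  have hRp : R.testBit p = false := by
    rw [hRdef, Nat.testBit_xor, hm1kp, testBit_pow]
    simp
  have hM2len : M2.length = n := by
    rw [hM2, elimRows_length, hM1len]
  have hM2row : ∀ r : Nat, M2.getD r [] =
      if r < n ∧ r ≠ p ∧ entry M1 r k = 1
      then pvXorRow (M1.getD r []) (M1.getD p []) (nc : Int)
      else M1.getD r [] := by
    intro r
    rw [hM2]
    have h := elimRows_getD M1 p (k : Int) (nc : Int) n (by omega) r
    have hg1 : pvGet2 M1 (r : Int) (k : Int) = entry M1 r k := by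
      rw [pvGet2_eq _ _ _ (by positivity) (by positivity)]
      simp
    rw [hg1] at h
    exact h
  have hM2good : Good nc M2 := by
    rw [hM2]
    have hfold := foldl_preserve
      (P := fun (X : List (List Int)) => Good nc X ∧ X.length = n)
      (fun Mc r => if r != (p : Int) && (pvGet2 Mc r (k : Int) == 1)
                   then Mc.set r.toNat (pvXorRow (PySem.List.pyGetD Mc r [])
                          (PySem.List.pyGetD Mc (p : Int) []) (nc : Int))
                   else Mc)
      (PySem.List.pyRange 0 (n : Int) 1) M1 ?_ ⟨hM1good, hM1len⟩
    · exact hfold.1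
    · intro X b hb hX
      obtain ⟨hXg, hXl⟩ := hX
      dsimp only
      by_cases hgrd : (b != (p : Int) && (pvGet2 X b (k : Int) == 1)) = true
      · rw [if_pos hgrd]
        have hb' : 0 ≤ b ∧ b < (n : Int) := by
          have := PySem.List.mem_pyRange_one.mp hb
          exact this
        have hbe : b = ((b.toNat : Nat) : Int) := (Int.toNat_of_nonneg hb'.1).symm
        have hbn : b.toNat < n := by omega
        have hrow : PySem.List.pyGetD X b [] = X.getD b.toNat [] := by
          rw [hbe, PySem.List.pyGetD_natCast, Int.toNat_natCast]
        have hprow : PySem.List.pyGetD X (p : Int) [] = X.getD p [] := by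
          rw [PySem.List.pyGetD_natCast]
        have hg1 := good_row hXg (r := b.toNat) (by omega)
        have hg2 := good_row hXg (r := p) (by omega)
        constructor
        · apply set_row_good hXg
          · rw [hrow, pvXorRow_length, hg1.1]
          · rw [hrow, hprow]
            exact pvXorRow_01 hg1.1 hg1.2 hg2.2
        · rw [List.length_set, hXl]
      · rw [if_neg hgrd]
        exact ⟨hXg, hXl⟩
  have hM2entry : ∀ r c : Nat, entry M2 r c =
      if r < n ∧ r ≠ p ∧ entry M1 r k = 1
      then (if c < nc then PySem.Int.bxor (entry M1 r c) (entry M1 p c) else entry M1 r c)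
      else entry M1 r c := by
    intro r c
    show (M2.getD r []).getD c 0 = _
    rw [hM2row r]
    by_cases hcnd : r < n ∧ r ≠ p ∧ entry M1 r k = 1
    · rw [if_pos hcnd, if_pos hcnd]
      have hrl : (M1.getD r []).length = nc := (good_row hM1good (by omega)).1
      rw [pvXorRow_getD _ _ nc (by omega) c]
      rfl
    · rw [if_neg hcnd, if_neg hcnd]
      rfl
  have hRr : ∀ r : Nat, R.testBit r = (decide (r ≠ p) && decide (entry M1 r k = 1)) := by
    intro r
    rw [hRdef, Nat.testBit_xor, testBit_colMask, testBit_pow]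
    by_cases hrp : r = p
    · subst hrp
      simp [hpk1]
    · have h2 : decide (p = r) = false := by simp [Ne.symm hrp]
      rw [h2]
      simp [hrp]
  have hcol2 : ∀ j, colMask M2 j = xorMap R p (colMask M1 j) := by
    intro j
    by_cases hj : j < nc
    · apply Nat.eq_of_testBit_eq
      intro r
      rw [testBit_colMask, xorMap_testBit]
      by_cases hrn : r < n
      · rw [hM2entry r j]
        by_cases hcnd : r ≠ p ∧ entry M1 r k = 1
        · rw [if_pos ⟨hrn, hcnd⟩, if_pos hj,
            bxor01 (entry01 hM1good r j) (entry01 hM1good p j)]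
          rw [testBit_colMask, testBit_colMask, hRr r]
          by_cases h1 : entry M1 r j = 1 <;> by_cases h2 : entry M1 p j = 1 <;>
            simp [h1, h2, hcnd.1, hcnd.2]
        · rw [if_neg (fun h => hcnd h.2)]
          have hRr0 : R.testBit r = false := by
            rw [hRr r]
            rcases not_and_or.mp hcnd with h | h
            · simp [not_not.mp h]
            · simp [h]
          rw [hRr0, Bool.and_false, Bool.xor_false, testBit_colMask]
      · have h0 : entry M1 r j = 0 := entry_hi (by omega) j
        have h0k : entry M1 r k = 0 := entry_hi (by omega) k
        have hM2r : entry M2 r j = 0 := by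
          rw [hM2entry r j, if_neg (fun h => hrn h.1), h0]
        have hRr0 : R.testBit r = false := by rw [hRr r, h0k]; simp
        rw [hM2r, testBit_colMask, testBit_colMask, h0, hRr0]
        simp
    · have hjn : nc ≤ j := by omega
      rw [colMask_hi hM2good hjn, colMask_hi hM1good hjn, xorMap_lo (Nat.zero_testBit p)]
  refine ⟨hM2len, hM2good, ?_⟩
  intro j
  rw [hcol2 j, hcol1 j, ← hRgoal]

-- ---- the joint invariant and the bisimulation ----
structure EInv (M0 : List (List Int)) (nc k : Nat) (M : List (List Int)) (p : Nat)
    (piv : PySem.Dict Int Nat) (rank : Int) : Prop where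
  hlen : M.length = M0.length
  hgood : Good nc M
  hple : p ≤ M0.length
  hrank : rank = (p : Int)
  hlt : ∀ j < k, colMask M j < 2 ^ p
  hunits : ∀ i < p, ∃ c < k, colMask M c = 2 ^ i
  htrans : ∃ L Li : Nat → Nat, (∀ x y, L (x ^^^ y) = L x ^^^ L y) ∧
      (∀ x y, Li (x ^^^ y) = Li x ^^^ Li y) ∧ (∀ x, Li (L x) = x) ∧
      (∀ j : Nat, colMask M j = L (colMask M0 j))
  hpiv : PivInv piv
  hspan : ∀ x, XSpan piv.values x ↔ XSpan ((List.range k).map (colMask M0)) x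

theorem einv_step {M0 : List (List Int)} {nc k : Nat} {M : List (List Int)} {p : Nat}
    {piv : PySem.Dict Int Nat} {rank : Int} (hk : k < nc)
    (inv : EInv M0 nc k M p piv rank) :
    ∃ (M' : List (List Int)) (p' : Nat) (piv' : PySem.Dict Int Nat) (rank' : Int),
      pvElimCol (M0.length : Int) (nc : Int) (M, (p : Int)) (k : Int) = (M', (p' : Int)) ∧
      altReduce piv rank (colMask M0 k) = (piv', rank') ∧
      EInv M0 nc (k + 1) M' p' piv' rank' := by
  obtain ⟨hlen, hgood, hple, hrank, hlt, hunits, ⟨L, Li, hLlin, hLilin, hLiL, hLcol⟩,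
    hpiv, hspan⟩ := inv
  by_cases hex : ∃ r, p ≤ r ∧ r < M0.length ∧ entry M r k = 1
  case neg =>
    push_neg at hex
    have hfind : pvFindPivot M (k : Int)
        (PySem.List.pyRange (p : Int) ((M0.length : Nat) : Int) 1) = -1 := by
      have h := findPivot_none M k (M0.length - p) p
        (fun r h1 h2 => hex r h1 (by omega))
      rw [show ((p + (M0.length - p) : Nat) : Int) = ((M0.length : Nat) : Int) by
        push_cast; omega] at h
      exact h
    have hA : pvElimCol (M0.length : Int) (nc : Int) (M, (p : Int)) (k : Int)
        = (M, (p : Int)) := by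
      simp only [pvElimCol, hfind]
      rfl
    have hmlt : colMask M k < 2 ^ p := by
      apply Nat.lt_pow_two_of_testBit
      intro j hj
      rw [testBit_colMask]
      simp only [decide_eq_false_iff_not]
      intro hc1
      rcases Nat.lt_or_ge j M0.length with hjn | hjn
      · exact hex j hj hjn hc1
      · rw [entry_hi (by omega)] at hc1
        norm_num at hc1
    have hXk : XSpan piv.values (colMask M0 k) := by
      have h1 : XSpan ((List.range k).map (colMask M)) (colMask M k) := by
        refine XSpan.of_lt_units (p := p) ?_ _ hmlt
        intro i hi
        obtain ⟨c, hc, hcol⟩ := hunits i hi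
        exact List.mem_map.mpr ⟨c, List.mem_range.mpr hc, hcol⟩
      have h2 := XSpan.map hLilin h1
      have h3 : ((List.range k).map (colMask M)).map Li = (List.range k).map (colMask M0) := by
        rw [List.map_map]
        refine List.map_congr_left (fun j _ => ?_)
        show Li (colMask M j) = colMask M0 j
        rw [hLcol j, hLiL]
      rw [h3, hLcol k, hLiL] at h2
      exact (hspan _).mpr h2
    obtain ⟨piv', rank', hBeq, hpiv', hspan', hcase⟩ :=
      altReduce_spec (colMask M0 k) (colMask M0 k) le_rfl piv rank hpiv
    obtain ⟨-, -, hreq⟩ := hcase.resolve_right (fun h => h.1 hXk)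
    refine ⟨M, p, piv', rank', hA, hBeq, ?_⟩
    refine ⟨hlen, hgood, hple, by rw [hreq, hrank], ?_, ?_,
      ⟨L, Li, hLlin, hLilin, hLiL, hLcol⟩, hpiv', ?_⟩
    · intro j hj
      rcases Nat.lt_succ_iff_lt_or_eq.mp hj with h | h
      · exact hlt j h
      · rw [h]; exact hmlt
    · intro i hi
      obtain ⟨c, hc, hcol⟩ := hunits i hi
      exact ⟨c, by omega, hcol⟩
    · intro x
      rw [hspan' x, XSpan.cons_congr hspan _ x]
      refine XSpan.congr (fun v => ?_) x
      simp [List.range_succ]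
      exact or_comm
  case pos =>
    have hfspec := Nat.find_spec hex
    set f := Nat.find hex with hfdef
    obtain ⟨hpf, hfn, hfk⟩ := hfspec
    have hmin : ∀ r, p ≤ r → r < f → entry M r k ≠ 1 := by
      intro r h1 h2 hc
      exact Nat.find_min hex h2 ⟨h1, by omega, hc⟩
    have hfind : pvFindPivot M (k : Int)
        (PySem.List.pyRange (p : Int) ((M0.length : Nat) : Int) 1) = (f : Int) := by
      have h := findPivot_found M k (M0.length - p) p f hpf (by omega) hfk hmin
      rw [show ((p + (M0.length - p) : Nat) : Int) = ((M0.length : Nat) : Int) by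
        push_cast; omega] at h
      exact h
    set M1 := (M.set p (M.getD f [])).set f (M.getD p []) with hM1def
    set M2 := (PySem.List.pyRange 0 ((M0.length : Nat) : Int) 1).foldl
      (fun Mc r => if r != (p : Int) && (pvGet2 Mc r (k : Int) == 1)
                   then Mc.set r.toNat (pvXorRow (PySem.List.pyGetD Mc r [])
                          (PySem.List.pyGetD Mc (p : Int) []) (nc : Int))
                   else Mc) M1 with hM2def
    have hM1eq : (M.set ((p : Int)).toNat (PySem.List.pyGetD M ((f : Int)) [])).set
        ((f : Int)).toNat (PySem.List.pyGetD M ((p : Int)) []) = M1 := by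
      rw [PySem.List.pyGetD_natCast, PySem.List.pyGetD_natCast, Int.toNat_natCast,
        Int.toNat_natCast, hM1def]
    have hA : pvElimCol (M0.length : Int) (nc : Int) (M, (p : Int)) (k : Int)
        = (M2, (p : Int) + 1) := by
      simp only [pvElimCol, hfind]
      rw [if_neg (by simp : ¬(((f : Int) == -1) = true))]
      rw [hM1eq, ← hM2def]
    obtain ⟨hM2len, hM2good, hM2col⟩ :=
      elim_colMask M M0.length nc p f k hgood hlen hpf hfn hk hfk M2 hM2def
    set R := swapMap p f (colMask M k) ^^^ 2 ^ p with hRdef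
    have hmf : (colMask M k).testBit f = true := by
      rw [testBit_colMask]; simp [hfk]
    have hm1kp : (swapMap p f (colMask M k)).testBit p = true := by
      rw [swapMap_testBit, if_pos rfl]; exact hmf
    have hRp : R.testBit p = false := by
      rw [hRdef, Nat.testBit_xor, hm1kp, testBit_pow]; simp
    have hcolk : colMask M2 k = 2 ^ p := by
      rw [hM2col k]
      unfold xorMap
      rw [if_pos (by simpa using hm1kp), hRdef, xor_left_cancel]
    have hold : ∀ j, j < k → colMask M2 j = colMask M j := by
      intro j hj
      have hlo := hlt j hj
      have hbp : (colMask M j).testBit p = false := Nat.testBit_lt_two_pow hlo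
      have hbf : (colMask M j).testBit f = false :=
        Nat.testBit_lt_two_pow
          (lt_of_lt_of_le hlo (Nat.pow_le_pow_right (by norm_num) hpf))
      rw [hM2col j, swapMap_lo hbp hbf, xorMap_lo hbp]
    have hnot : ¬ XSpan piv.values (colMask M0 k) := by
      intro hc
      have h1 := (hspan _).mp hc
      have h2 := XSpan.map hLlin h1
      have h3 : ((List.range k).map (colMask M0)).map L = (List.range k).map (colMask M) := by
        rw [List.map_map]
        exact List.map_congr_left (fun j _ => (hLcol j).symm)
      rw [h3, ← hLcol k] at h2
      have h4 : colMask M k < 2 ^ p := by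
        refine XSpan.lt (fun v hv => ?_) h2
        obtain ⟨j, hj, rfl⟩ := List.mem_map.mp hv
        exact hlt j (List.mem_range.mp hj)
      have h5 : 2 ^ p ≤ colMask M k :=
        le_trans (Nat.pow_le_pow_right (by norm_num) hpf) (Nat.ge_two_pow_of_testBit hmf)
      omega
    obtain ⟨piv', rank', hBeq, hpiv', hspan', hcase⟩ :=
      altReduce_spec (colMask M0 k) (colMask M0 k) le_rfl piv rank hpiv
    obtain ⟨-, hrk⟩ := hcase.resolve_left (fun h => hnot h.1)
    refine ⟨M2, p + 1, piv', rank', ?_, hBeq, ?_⟩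
    · rw [hA]
      congr 1
      try omega
    refine ⟨hM2len, hM2good, by omega, by rw [hrk, hrank]; omega,
      ?_, ?_, ?_, hpiv', ?_⟩
    · intro j hj
      rcases Nat.lt_succ_iff_lt_or_eq.mp hj with h | h
      · rw [hold j h]
        exact lt_trans (hlt j h) (Nat.pow_lt_pow_right one_lt_two (Nat.lt_succ_self p))
      · rw [h, hcolk]
        exact Nat.pow_lt_pow_right one_lt_two (Nat.lt_succ_self p)
    · intro i hi
      rcases Nat.lt_succ_iff_lt_or_eq.mp hi with h | h
      · obtain ⟨c, hc, hcol⟩ := hunits i h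
        refine ⟨c, by omega, ?_⟩
        rw [hold c hc, hcol]
      · exact ⟨k, by omega, by rw [hcolk, h]⟩
    · refine ⟨fun x => xorMap R p (swapMap p f (L x)),
        fun x => Li (swapMap p f (xorMap R p x)), ?_, ?_, ?_, ?_⟩
      · intro x y
        dsimp only
        rw [hLlin, swapMap_linear, xorMap_linear hRp]
      · intro x y
        dsimp only
        rw [xorMap_linear hRp, swapMap_linear, hLilin]
      · intro x
        dsimp only
        rw [xorMap_invol hRp, swapMap_invol, hLiL]
      · intro j
        dsimp only
        rw [hM2col j, hLcol j]
    · intro x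
      rw [hspan' x, XSpan.cons_congr hspan _ x]
      refine XSpan.congr (fun v => ?_) x
      simp [List.range_succ]
      exact or_comm

theorem einv_master (M0 : List (List Int)) (nc : Nat) (m : Nat) :
    ∀ (k : Nat) (M : List (List Int)) (p : Nat) (piv : PySem.Dict Int Nat) (rank : Int),
      k + m = nc → EInv M0 nc k M p piv rank →
      ∃ (M' : List (List Int)) (p' : Nat) (piv' : PySem.Dict Int Nat) (rank' : Int),
        ((PySem.List.pyRange (k : Int) (nc : Int) 1).foldl
          (pvElimCol (M0.length : Int) (nc : Int)) (M, (p : Int))) = (M', (p' : Int)) ∧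
        (((List.range' k m).map (colMask M0)).foldl
          (fun st v => altReduce st.1 st.2 v) (piv, rank)) = (piv', rank') ∧
        rank' = (p' : Int) := by
  induction m with
  | zero =>
    intro k M p piv rank hkm inv
    have hk : k = nc := by omega
    subst hk
    refine ⟨M, p, piv, rank, ?_, rfl, inv.hrank⟩
    rw [PySem.List.pyRange_one_eq_nil (le_refl ((k : Nat) : Int))]
    rfl
  | succ m ih =>
    intro k M p piv rank hkm inv
    have hk : k < nc := by omega
    obtain ⟨M1, p1, piv1, rank1, hA, hB, inv'⟩ := einv_step hk inv
    obtain ⟨M', p', piv', rank', hA', hB', hrp⟩ :=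
      ih (k + 1) M1 p1 piv1 rank1 (by omega) inv'
    refine ⟨M', p', piv', rank', ?_, ?_, hrp⟩
    · rw [PySem.List.pyRange_one_cons (by exact_mod_cast hk), List.foldl_cons, hA,
        show ((k : Int) + 1) = (((k + 1 : Nat)) : Int) by push_cast; ring]
      exact hA'
    · rw [show List.range' k (m + 1) = k :: List.range' (k + 1) m from List.range'_succ .. ,
        List.map_cons, List.foldl_cons]
      have hstep1 : altReduce (piv, rank).1 (piv, rank).2 (colMask M0 k) = (piv1, rank1) := hB
      rw [hstep1]
      exact hB'

theorem rank_agree (M0 : List (List Int)) (nc : Nat) (hg : Good nc M0)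
    (hr : M0.length ≠ 0) (hc : nc ≠ 0) :
    pvZ2Rank M0 (M0.length : Int) (nc : Int) =
      altRank ((List.range nc).map (colMask M0)) := by
  have hvals : (PySem.Dict.empty : PySem.Dict Int Nat).values = [] := rfl
  have hitems : (PySem.Dict.empty : PySem.Dict Int Nat).items = [] := rfl
  have hkeys : (PySem.Dict.empty : PySem.Dict Int Nat).keys = [] := rfl
  have inv0 : EInv M0 nc 0 M0 0 PySem.Dict.empty 0 := by
    refine ⟨rfl, hg, Nat.zero_le _, by simp, ?_, ?_, ⟨id, id, ?_, ?_, ?_, ?_⟩, ?_, ?_⟩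
    · intro j hj; exact absurd hj (Nat.not_lt_zero j)
    · intro i hi; exact absurd hi (Nat.not_lt_zero i)
    · intro x y; rfl
    · intro x y; rfl
    · intro x; rfl
    · intro j; rfl
    · constructor
      · rw [hkeys]; exact List.nodup_nil
      · intro q hq
        rw [hitems] at hq
        exact absurd hq (List.not_mem_nil)
    · intro x
      rw [hvals]
      simp only [List.range_zero, List.map_nil]
  obtain ⟨M', p', piv', rank', hA, hB, hrp⟩ :=
    einv_master M0 nc nc 0 M0 0 PySem.Dict.empty 0 (by omega) inv0
  simp only [Nat.cast_zero] at hA hB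
  unfold pvZ2Rank
  rw [if_neg (by simp [hr, hc])]
  rw [hA]
  unfold altRank
  rw [List.range_eq_range', hB]
  exact hrp.symm

theorem altRank_zeros (l : List Nat) (h : ∀ v ∈ l, v = 0) : altRank l = 0 := by
  have key : ∀ st : PySem.Dict Int Nat × Int,
      l.foldl (fun st v => altReduce st.1 st.2 v) st = st := by
    induction l with
    | nil => intro st; rfl
    | cons v vs ih =>
      intro st
      rw [List.foldl_cons]
      have hv : v = 0 := h v (by simp)
      subst hv
      have : altReduce st.1 st.2 0 = (st.1, st.2) := rfl
      rw [this]
      exact ih (fun x hx => h x (by simp [hx])) st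
  simp only [altRank, key]

-- ---- construction of d1 and its columns ----
theorem pvSet2_entry (M : List (List Int)) (r0 c0 : Int) (x : Int) (h0 : 0 ≤ r0)
    (r c : Nat) :
    entry (pvSet2 M r0 c0 x) r c =
      if r = r0.toNat ∧ c = c0.toNat ∧ r0.toNat < M.length ∧ c0.toNat < (M.getD r0.toNat []).length
      then x else entry M r c := by
  have hgd : PySem.List.pyGetD M r0 [] = M.getD r0.toNat [] := by
    rw [show r0 = ((r0.toNat : Nat) : Int) from (Int.toNat_of_nonneg h0).symm,
      PySem.List.pyGetD_natCast, Int.toNat_natCast]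
  unfold pvSet2 entry
  rw [hgd, getD_set']
  by_cases h1 : r = r0.toNat ∧ r0.toNat < M.length
  · rw [if_pos h1, getD_set']
    obtain ⟨rfl, hlt⟩ := h1
    by_cases h2 : c = c0.toNat ∧ c0.toNat < (M.getD r0.toNat []).length
    · rw [if_pos h2, if_pos ⟨rfl, h2.1, hlt, h2.2⟩]
    · rw [if_neg h2, if_neg (fun h => h2 ⟨h.2.1, h.2.2.2⟩)]
  · rw [if_neg h1, if_neg (fun h => h1 ⟨h.1, h.2.2.1⟩)]

theorem pvSet2_length (M : List (List Int)) (r0 c0 x : Int) :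
    (pvSet2 M r0 c0 x).length = M.length := by
  simp [pvSet2]

theorem pvSet2_rowlen {nE : Nat} {M : List (List Int)} (h : ∀ row ∈ M, row.length = nE)
    (r0 c0 x : Int) (h0 : 0 ≤ r0) : ∀ row ∈ pvSet2 M r0 c0 x, row.length = nE := by
  have hgd : PySem.List.pyGetD M r0 [] = M.getD r0.toNat [] := by
    rw [show r0 = ((r0.toNat : Nat) : Int) from (Int.toNat_of_nonneg h0).symm,
      PySem.List.pyGetD_natCast, Int.toNat_natCast]
  by_cases hr : r0.toNat < M.length
  · intro row hrow
    unfold pvSet2 at hrow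
    rw [hgd] at hrow
    rcases List.mem_or_eq_of_mem_set hrow with hmem | rfl
    · exact h row hmem
    · rw [List.length_set]
      exact h _ (by rw [List.getD_eq_getElem M [] hr]; exact List.getElem_mem hr)
  · intro row hrow
    unfold pvSet2 at hrow
    rw [List.set_eq_of_length_le (by omega)] at hrow
    exact h row hrow

theorem pvSet2_good {nc : Nat} {M : List (List Int)} (hg : Good nc M) (r0 c0 : Int)
    (h0 : 0 ≤ r0) : Good nc (pvSet2 M r0 c0 1) := by
  have hgd : PySem.List.pyGetD M r0 [] = M.getD r0.toNat [] := by
    rw [show r0 = ((r0.toNat : Nat) : Int) from (Int.toNat_of_nonneg h0).symm,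
      PySem.List.pyGetD_natCast, Int.toNat_natCast]
  by_cases hr : r0.toNat < M.length
  · intro row hrow
    unfold pvSet2 at hrow
    rw [hgd] at hrow
    rcases List.mem_or_eq_of_mem_set hrow with hmem | rfl
    · exact hg row hmem
    · have hrow0 : M.getD r0.toNat [] ∈ M := by
        rw [List.getD_eq_getElem M [] hr]; exact List.getElem_mem hr
      obtain ⟨hlen0, h01⟩ := hg _ hrow0
      refine ⟨by rw [List.length_set]; exact hlen0, ?_⟩
      intro x hx
      rcases List.mem_or_eq_of_mem_set hx with hx' | rfl
      · exact h01 x hx'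
      · right; rfl
  · unfold pvSet2
    rw [List.set_eq_of_length_le (by omega)]
    exact hg

theorem entry_zeros (nr nc : Int) (r c : Nat) : entry (pvZeros nr nc) r c = 0 := by
  have hrow : ∀ (l : List Int), (∀ x ∈ l, x = 0) → l.getD c 0 = 0 := by
    intro l hl
    rcases Nat.lt_or_ge c l.length with h | h
    · rw [List.getD_eq_getElem _ _ h]; exact hl _ (List.getElem_mem h)
    · rw [List.getD_eq_default _ _ h]
  unfold entry
  rcases Nat.lt_or_ge r (pvZeros nr nc).length with h | h
  · rw [List.getD_eq_getElem _ _ h]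
    refine hrow _ (fun x hx => ?_)
    have hmem : (pvZeros nr nc)[r] ∈ pvZeros nr nc := List.getElem_mem h
    have := List.eq_of_mem_replicate hmem
    rw [this] at hx
    exact List.eq_of_mem_replicate hx
  · rw [List.getD_eq_default _ _ h]; rfl

theorem zeros_good (nr nc : Int) : Good nc.toNat (pvZeros nr nc) := by
  intro row hrow
  unfold pvZeros at hrow
  rw [List.eq_of_mem_replicate hrow]
  exact ⟨by simp, fun x hx => Or.inl (List.eq_of_mem_replicate hx)⟩

theorem buildD1_aux (nE : Nat) : ∀ (xs : List (Int × Int)) (s : Nat) (M : List (List Int)),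
    (∀ row ∈ M, row.length = nE) →
    (∀ e ∈ xs, 0 ≤ e.1 ∧ e.1.toNat < M.length ∧ 0 ≤ e.2 ∧ e.2.toNat < M.length) →
    s + xs.length ≤ nE →
    ∀ r c : Nat,
      entry ((PySem.List.enumerate xs (s : Int)).foldl
        (fun M je => pvSet2 (pvSet2 M je.2.1 je.1 1) je.2.2 je.1 1) M) r c =
      if (∃ t, t < xs.length ∧ c = s + t ∧
          ((r : Int) = (xs.getD t (0,0)).1 ∨ (r : Int) = (xs.getD t (0,0)).2))
      then 1 else entry M r c := by
  intro xs
  induction xs with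
  | nil =>
    intro s M _ _ _ r c
    simp [PySem.List.enumerate_nil]
  | cons e xs ih =>
    intro s M hrows hpre hle r c
    rw [PySem.List.enumerate_cons, List.foldl_cons]
    obtain ⟨h1, h2, h3, h4⟩ := hpre e (by simp)
    have hg2 : ∀ row ∈ pvSet2 M e.1 (s : Int) 1, row.length = nE :=
      pvSet2_rowlen hrows _ _ _ h1
    have hlen2 : (pvSet2 M e.1 (s : Int) 1).length = M.length := pvSet2_length _ _ _ _
    have hs_lt : s < nE := by simp at hle; omega
    have hM1rows : ∀ row ∈ pvSet2 (pvSet2 M e.1 (s : Int) 1) e.2 (s : Int) 1,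
        row.length = nE := pvSet2_rowlen hg2 _ _ _ h3
    have hM1len : (pvSet2 (pvSet2 M e.1 (s : Int) 1) e.2 (s : Int) 1).length = M.length := by
      rw [pvSet2_length, hlen2]
    have hrow1 : (M.getD e.1.toNat []).length = nE :=
      hrows _ (by rw [List.getD_eq_getElem M [] h2]; exact List.getElem_mem h2)
    have hrow2 : ((pvSet2 M e.1 (s : Int) 1).getD e.2.toNat []).length = nE :=
      hg2 _ (by
        rw [List.getD_eq_getElem _ [] (by rw [hlen2]; exact h4)]
        exact List.getElem_mem _)
    have hentry1 : ∀ r c : Nat,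
        entry (pvSet2 (pvSet2 M e.1 (s : Int) 1) e.2 (s : Int) 1) r c =
          if c = s ∧ ((r : Int) = e.1 ∨ (r : Int) = e.2) then 1 else entry M r c := by
      intro r c
      rw [pvSet2_entry _ _ _ _ h3, pvSet2_entry _ _ _ _ h1]
      simp only [Int.toNat_natCast]
      have hiff1 : r = e.1.toNat ↔ (r : Int) = e.1 := by omega
      have hiff2 : r = e.2.toNat ↔ (r : Int) = e.2 := by omega
      by_cases hcs : c = s
      · subst hcs
        by_cases hr2 : r = e.2.toNat
        · rw [if_pos ⟨hr2, rfl, by rw [hlen2]; exact h4, by rw [hrow2]; exact hs_lt⟩,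
            if_pos ⟨rfl, Or.inr (hiff2.mp hr2)⟩]
        · rw [if_neg (fun h => hr2 h.1)]
          by_cases hr1 : r = e.1.toNat
          · rw [if_pos ⟨hr1, rfl, h2, by rw [hrow1]; exact hs_lt⟩,
              if_pos ⟨rfl, Or.inl (hiff1.mp hr1)⟩]
          · rw [if_neg (fun h => hr1 h.1)]
            rw [if_neg (fun h => h.2.elim (fun hh => hr1 (hiff1.mpr hh))
              (fun hh => hr2 (hiff2.mpr hh)))]
      · rw [if_neg (fun h => hcs h.2.1), if_neg (fun h => hcs h.2.1),
          if_neg (fun h => hcs h.1)]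
    have hpre' : ∀ e' ∈ xs, 0 ≤ e'.1 ∧
        e'.1.toNat < (pvSet2 (pvSet2 M e.1 (s : Int) 1) e.2 (s : Int) 1).length ∧
        0 ≤ e'.2 ∧ e'.2.toNat < (pvSet2 (pvSet2 M e.1 (s : Int) 1) e.2 (s : Int) 1).length := by
      intro e' he'
      obtain ⟨a1, a2, a3, a4⟩ := hpre e' (by simp [he'])
      rw [hM1len]
      exact ⟨a1, a2, a3, a4⟩
    have hrec := ih (s + 1) _ hM1rows hpre' (by simp at hle ⊢; omega) r c
    rw [show ((s : Int) + 1) = ((s + 1 : Nat) : Int) by push_cast; ring]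
    rw [hrec, hentry1 r c]
    by_cases hQ1 : ∃ t, t < xs.length ∧ c = (s + 1) + t ∧
        ((r : Int) = (xs.getD t (0,0)).1 ∨ (r : Int) = (xs.getD t (0,0)).2)
    · rw [if_pos hQ1]
      obtain ⟨t, ht, hct, hm⟩ := hQ1
      refine (if_pos ⟨t + 1, by simp; omega, by omega, ?_⟩).symm
      simpa [List.getD_cons_succ] using hm
    · rw [if_neg hQ1]
      by_cases hQ0 : c = s ∧ ((r : Int) = e.1 ∨ (r : Int) = e.2)
      · rw [if_pos hQ0]
        refine (if_pos ⟨0, by simp, by omega, by simpa [List.getD_cons_zero] using hQ0.2⟩).symm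
      · rw [if_neg hQ0]
        refine (if_neg ?_).symm
        rintro ⟨t, ht, hct, hm⟩
        cases t with
        | zero => exact hQ0 ⟨by omega, by simpa [List.getD_cons_zero] using hm⟩
        | succ t =>
          exact hQ1 ⟨t, by simp at ht; omega, by omega,
            by simpa [List.getD_cons_succ] using hm⟩

theorem buildD1_entry (nV : Int) (edges : List (Int × Int))
    (hpre : ∀ e ∈ edges, 0 ≤ e.1 ∧ e.1 < nV ∧ 0 ≤ e.2 ∧ e.2 < nV) (r c : Nat) :
    entry (pvBuildD1 nV (edges.length : Int) edges) r c =
      if c < edges.length ∧ ((r : Int) = (edges.getD c (0,0)).1 ∨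
          (r : Int) = (edges.getD c (0,0)).2)
      then 1 else 0 := by
  unfold pvBuildD1
  have h := buildD1_aux edges.length edges 0 (pvZeros nV (edges.length : Int))
    (fun row hrow => by rw [List.eq_of_mem_replicate hrow]; simp)
    (fun e he => by
      obtain ⟨a1, a2, a3, a4⟩ := hpre e he
      refine ⟨a1, ?_, a3, ?_⟩ <;> · simp [pvZeros]; omega)
    (by omega) r c
  simp only [Nat.cast_zero, Nat.zero_add] at h
  rw [h]
  by_cases hQ : c < edges.length ∧ ((r : Int) = (edges.getD c (0,0)).1 ∨
      (r : Int) = (edges.getD c (0,0)).2)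
  · rw [if_pos ⟨c, hQ.1, rfl, hQ.2⟩, if_pos hQ]
  · rw [if_neg ?_, if_neg hQ, entry_zeros]
    rintro ⟨t, ht, hct, hm⟩
    subst hct
    exact hQ ⟨ht, hm⟩

theorem buildD1_good (nV : Int) (edges : List (Int × Int))
    (hpre : ∀ e ∈ edges, 0 ≤ e.1 ∧ e.1 < nV ∧ 0 ≤ e.2 ∧ e.2 < nV) :
    Good edges.length (pvBuildD1 nV (edges.length : Int) edges) ∧
    (pvBuildD1 nV (edges.length : Int) edges).length = nV.toNat := by
  have hmem : ∀ b ∈ PySem.List.enumerate edges 0, 0 ≤ b.2.1 ∧ 0 ≤ b.2.2 := by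
    intro b hb
    rw [PySem.List.mem_enumerate_iff] at hb
    obtain ⟨k, hk, rfl⟩ := hb
    obtain ⟨a1, _, a3, _⟩ := hpre _ (List.getElem_mem hk)
    exact ⟨a1, a3⟩
  constructor
  · unfold pvBuildD1
    apply foldl_preserve (P := Good edges.length)
    · intro x b hb hPx
      obtain ⟨hb1, hb2⟩ := hmem b hb
      exact pvSet2_good (pvSet2_good hPx _ _ hb1) _ _ hb2
    · have := zeros_good nV (edges.length : Int)
      simpa using this
  · unfold pvBuildD1
    apply foldl_preserve (P := fun (M : List (List Int)) => M.length = nV.toNat)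
    · intro x b _ hPx
      rw [pvSet2_length, pvSet2_length, hPx]
    · simp [pvZeros]

theorem colMask_buildD1 (nV : Int) (edges : List (Int × Int))
    (hpre : ∀ e ∈ edges, 0 ≤ e.1 ∧ e.1 < nV ∧ 0 ≤ e.2 ∧ e.2 < nV) (c : Nat)
    (hc : c < edges.length) :
    colMask (pvBuildD1 nV (edges.length : Int) edges) c =
      (1 <<< ((edges.getD c (0,0)).1.toNat)) ||| (1 <<< ((edges.getD c (0,0)).2.toNat)) := by
  obtain ⟨hu0, huV, hv0, hvV⟩ := hpre (edges.getD c (0,0))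
    (by rw [List.getD_eq_getElem _ _ hc]; exact List.getElem_mem hc)
  apply Nat.eq_of_testBit_eq
  intro r
  rw [testBit_colMask, buildD1_entry nV edges hpre r c,
    shift_eq_pow, shift_eq_pow, Nat.testBit_or, testBit_pow, testBit_pow]
  have he1 : (edges.getD c (0,0)).1.toNat = r ↔ (r : Int) = (edges.getD c (0,0)).1 := by omega
  have he2 : (edges.getD c (0,0)).2.toNat = r ↔ (r : Int) = (edges.getD c (0,0)).2 := by omega
  have hg : edges.getD c (0,0) = edges[c] := List.getD_eq_getElem _ _ hc
  rw [hg] at he1 he2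
  rw [hg]
  by_cases h1 : (r : Int) = (edges[c]).1 <;>
    by_cases h2 : (r : Int) = (edges[c]).2 <;>
    simp [hc, h1, h2, he1, he2]

-- ---- e_idx facts and construction of d2 ----
theorem pvEIdx_get?_bound (edges : List (Int × Int)) (e : Int × Int) (i : Int)
    (h : (pvEIdx edges).get? e = some i) : 0 ≤ i ∧ i < (edges.length : Int) := by
  revert h
  unfold pvEIdx
  have key : ∀ (l : List (Int × (Int × Int))) (d : PySem.Dict (Int × Int) Int),
      (∀ q ∈ l, 0 ≤ q.1 ∧ q.1 < (edges.length : Int)) →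
      (∀ e' i', d.get? e' = some i' → 0 ≤ i' ∧ i' < (edges.length : Int)) →
      ∀ e' i', ((l.foldl (fun d ie => d.insert ie.2 ie.1) d).get? e' = some i') →
        0 ≤ i' ∧ i' < (edges.length : Int) := by
    intro l
    induction l with
    | nil => intro d _ hd e' i' hg; exact hd e' i' hg
    | cons q l ihl =>
      intro d hl hd e' i' hg
      rw [List.foldl_cons] at hg
      refine ihl _ (fun q' hq' => hl q' (by simp [hq'])) ?_ e' i' hg
      intro e2 i2 hg2
      rw [PySem.Dict.get?_insert] at hg2
      by_cases he : e2 = q.2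
      · rw [if_pos he] at hg2
        obtain rfl : q.1 = i2 := by injection hg2
        exact hl q (by simp)
      · rw [if_neg he] at hg2
        exact hd e2 i2 hg2
  intro h
  refine key (PySem.List.enumerate edges 0) PySem.Dict.empty ?_ ?_ e i h
  · intro q hq
    rw [PySem.List.mem_enumerate_iff] at hq
    obtain ⟨k, hk, rfl⟩ := hq
    constructor <;> simp <;> omega
  · intro e' i' hg
    rw [PySem.Dict.get?_empty] at hg
    exact absurd hg (by simp)

theorem triFold_entry (eIdx : PySem.Dict (Int × Int) Int) {nE nc : Nat}
    (hbound : ∀ e i, eIdx.get? e = some i → 0 ≤ i ∧ i < (nE : Int))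
    (es : List (Int × Int)) (j : Nat) (hj : j < nc) :
    ∀ (M : List (List Int)), M.length = nE → (∀ row ∈ M, row.length = nc) →
    ∀ r c : Nat,
      entry (es.foldl (fun Mc e => if eIdx.contains e
          then pvSet2 Mc (eIdx.getD e 0) (j : Int) 1 else Mc) M) r c
        = if (∃ e ∈ es, eIdx.contains e = true ∧ (eIdx.getD e 0).toNat = r) ∧ c = j
          then 1 else entry M r c := by
  induction es with
  | nil =>
    intro M _ _ r c
    simp
  | cons e es ih =>
    intro M hMlen hMrows r c
    rw [List.foldl_cons]
    by_cases hcont : eIdx.contains e = true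
    · cases hgi : eIdx.get? e with
      | none =>
        have hcf : eIdx.contains e = false := by
          rw [← PySem.Dict.get?_eq_none_iff_contains]; exact hgi
        rw [hcf] at hcont
        exact absurd hcont (by simp)
      | some i =>
        have hib := hbound e i hgi
        have hgd : eIdx.getD e 0 = i := by
          rw [PySem.Dict.getD_eq_get?_getD, hgi]
          rfl
        have hM1len : (pvSet2 M (eIdx.getD e 0) (j : Int) 1).length = M.length :=
          pvSet2_length _ _ _ _
        have hM1rows : ∀ row ∈ pvSet2 M (eIdx.getD e 0) (j : Int) 1, row.length = nc :=
          pvSet2_rowlen hMrows _ _ _ (by rw [hgd]; exact hib.1)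
        have hrec := ih _ (by rw [hM1len, hMlen]) hM1rows r c
        rw [if_pos hcont, hrec]
        have hrowlen : (M.getD (eIdx.getD e 0).toNat []).length = nc := by
          apply hMrows
          rw [List.getD_eq_getElem M [] (by rw [hMlen, hgd]; omega)]
          exact List.getElem_mem _
        have hentry1 : entry (pvSet2 M (eIdx.getD e 0) (j : Int) 1) r c =
            if r = (eIdx.getD e 0).toNat ∧ c = j then 1 else entry M r c := by
          rw [pvSet2_entry _ _ _ _ (by rw [hgd]; exact hib.1)]
          simp only [Int.toNat_natCast]
          by_cases hx : r = (eIdx.getD e 0).toNat ∧ c = j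
          · rw [if_pos ⟨hx.1, hx.2, by rw [hMlen, hgd]; omega,
              by rw [hrowlen]; exact hj⟩, if_pos hx]
          · rw [if_neg (fun h => hx ⟨h.1, h.2.1⟩), if_neg hx]
        rw [hentry1]
        by_cases hQ1 : (∃ e' ∈ es, eIdx.contains e' = true ∧ (eIdx.getD e' 0).toNat = r) ∧ c = j
        · rw [if_pos hQ1, if_pos ⟨⟨hQ1.1.choose, by
            have := hQ1.1.choose_spec
            exact ⟨by simp [this.1], this.2⟩⟩, hQ1.2⟩]
        · rw [if_neg hQ1]
          by_cases hQ0 : r = (eIdx.getD e 0).toNat ∧ c = j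
          · rw [if_pos hQ0, if_pos ⟨⟨e, by simp, hcont, hQ0.1.symm⟩, hQ0.2⟩]
          · rw [if_neg hQ0]
            refine (if_neg ?_).symm
            rintro ⟨⟨e', he', hc', hr'⟩, rfl⟩
            rcases List.mem_cons.mp he' with rfl | he2
            · exact hQ0 ⟨hr'.symm, rfl⟩
            · exact hQ1 ⟨⟨e', he2, hc', hr'⟩, rfl⟩
    · have hcf : eIdx.contains e = false := by
        revert hcont; cases eIdx.contains e <;> simp
      rw [if_neg hcont]
      have hrec := ih M hMlen hMrows r c
      rw [hrec]
      by_cases hQ1 : (∃ e' ∈ es, eIdx.contains e' = true ∧ (eIdx.getD e' 0).toNat = r) ∧ c = j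
      · rw [if_pos hQ1, if_pos ⟨⟨hQ1.1.choose, by
          have := hQ1.1.choose_spec
          exact ⟨by simp [this.1], this.2⟩⟩, hQ1.2⟩]
      · rw [if_neg hQ1]
        refine (if_neg ?_).symm
        rintro ⟨⟨e', he', hc', hr'⟩, rfl⟩
        rcases List.mem_cons.mp he' with rfl | he2
        · rw [hc'] at hcf; exact Bool.noConfusion hcf
        · exact hQ1 ⟨⟨e', he2, hc', hr'⟩, rfl⟩

theorem buildD2_aux (eIdx : PySem.Dict (Int × Int) Int) {nE nT : Nat}
    (hbound : ∀ e i, eIdx.get? e = some i → 0 ≤ i ∧ i < (nE : Int)) :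
    ∀ (ts : List (Int × Int × Int)) (s : Nat) (M : List (List Int)),
    M.length = nE → (∀ row ∈ M, row.length = nT) → s + ts.length ≤ nT →
    ∀ r c : Nat,
      entry ((PySem.List.enumerate ts (s : Int)).foldl
        (fun M jt => (pvTriEdges jt.2.1 jt.2.2.1 jt.2.2.2).foldl
          (fun Mc e => if eIdx.contains e then pvSet2 Mc (eIdx.getD e 0) jt.1 1 else Mc) M)
        M) r c =
      if (∃ t, t < ts.length ∧ c = s + t ∧
          (∃ e ∈ pvTriEdges (ts.getD t (0,0,0)).1 (ts.getD t (0,0,0)).2.1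
              (ts.getD t (0,0,0)).2.2, eIdx.contains e = true ∧ (eIdx.getD e 0).toNat = r))
      then 1 else entry M r c := by
  intro ts
  induction ts with
  | nil =>
    intro s M _ _ _ r c
    simp [PySem.List.enumerate_nil]
  | cons tri ts ih =>
    intro s M hMlen hMrows hle r c
    rw [PySem.List.enumerate_cons, List.foldl_cons]
    have hs_lt : s < nT := by simp at hle; omega
    have hstep := triFold_entry eIdx hbound
      (pvTriEdges tri.1 tri.2.1 tri.2.2) s hs_lt M hMlen hMrows
    set M1 := (pvTriEdges tri.1 tri.2.1 tri.2.2).foldl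
      (fun Mc e => if eIdx.contains e then pvSet2 Mc (eIdx.getD e 0) (s : Int) 1 else Mc) M
      with hM1
    have hM1len0 : M1.length = M.length := by
      rw [hM1]
      apply foldl_preserve (P := fun (X : List (List Int)) => X.length = M.length)
      · intro x b _ hPx
        by_cases hcx : eIdx.contains b = true
        · rw [if_pos hcx, pvSet2_length, hPx]
        · rw [if_neg hcx]; exact hPx
      · rfl
    have hM1len : M1.length = nE := by rw [hM1len0, hMlen]
    have hM1rows : ∀ row ∈ M1, row.length = nT := by
      rw [hM1]
      apply foldl_preserve (P := fun (X : List (List Int)) => ∀ row ∈ X, row.length = nT)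
      · intro x b _ hPx
        by_cases hcx : eIdx.contains b = true
        · rw [if_pos hcx]; exact pvSet2_rowlen hPx _ _ _ (by
            rw [PySem.Dict.getD_eq_get?_getD]
            cases hgg : eIdx.get? b with
            | none => simp
            | some i => simpa using (hbound b i hgg).1)
        · rw [if_neg hcx]; exact hPx
      · exact hMrows
    have hrec := ih (s + 1) M1 hM1len hM1rows (by simp at hle ⊢; omega) r c
    rw [show ((s : Int) + 1) = ((s + 1 : Nat) : Int) by push_cast; ring]
    rw [hrec, hstep r c]
    by_cases hQ1 : ∃ t, t < ts.length ∧ c = (s + 1) + t ∧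
        (∃ e ∈ pvTriEdges (ts.getD t (0,0,0)).1 (ts.getD t (0,0,0)).2.1
            (ts.getD t (0,0,0)).2.2, eIdx.contains e = true ∧ (eIdx.getD e 0).toNat = r)
    · rw [if_pos hQ1]
      obtain ⟨t, ht, hct, hm⟩ := hQ1
      refine (if_pos ⟨t + 1, by simp; omega, by omega, ?_⟩).symm
      simpa [List.getD_cons_succ] using hm
    · rw [if_neg hQ1]
      by_cases hQ0 : (∃ e ∈ pvTriEdges tri.1 tri.2.1 tri.2.2,
          eIdx.contains e = true ∧ (eIdx.getD e 0).toNat = r) ∧ c = s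
      · rw [if_pos hQ0]
        refine (if_pos ⟨0, by simp, by omega, by simpa [List.getD_cons_zero] using hQ0.1⟩).symm
      · rw [if_neg hQ0]
        refine (if_neg ?_).symm
        rintro ⟨t, ht, hct, hm⟩
        cases t with
        | zero => exact hQ0 ⟨by simpa [List.getD_cons_zero] using hm, by omega⟩
        | succ t =>
          exact hQ1 ⟨t, by simp at ht; omega, by omega,
            by simpa [List.getD_cons_succ] using hm⟩

theorem buildD2_entry (edges0 : List (Int × Int))
    (triangles : List (Int × Int × Int)) (r c : Nat) :
    entry (pvBuildD2 (edges0.length : Int) (triangles.length : Int) (pvEIdx edges0) triangles) r c =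
      if c < triangles.length ∧
          (∃ e ∈ pvTriEdges (triangles.getD c (0,0,0)).1 (triangles.getD c (0,0,0)).2.1
              (triangles.getD c (0,0,0)).2.2,
            (pvEIdx edges0).contains e = true ∧ ((pvEIdx edges0).getD e 0).toNat = r)
      then 1 else 0 := by
  unfold pvBuildD2
  have h := buildD2_aux (pvEIdx edges0) (nE := edges0.length) (nT := triangles.length)
    (fun e i h => pvEIdx_get?_bound edges0 e i h) triangles 0
    (pvZeros (edges0.length : Int) (triangles.length : Int))
    (by simp [pvZeros]) (fun row hrow => by rw [List.eq_of_mem_replicate hrow]; simp)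
    (by omega) r c
  simp only [Nat.cast_zero, Nat.zero_add] at h
  rw [h]
  by_cases hQ : c < triangles.length ∧
      (∃ e ∈ pvTriEdges (triangles.getD c (0,0,0)).1 (triangles.getD c (0,0,0)).2.1
          (triangles.getD c (0,0,0)).2.2,
        (pvEIdx edges0).contains e = true ∧ ((pvEIdx edges0).getD e 0).toNat = r)
  · rw [if_pos ⟨c, hQ.1, rfl, hQ.2⟩, if_pos hQ]
  · rw [if_neg ?_, if_neg hQ, entry_zeros]
    rintro ⟨t, ht, hct, hm⟩
    subst hct
    exact hQ ⟨ht, hm⟩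

theorem buildD2_good (edges0 : List (Int × Int)) (triangles : List (Int × Int × Int)) :
    Good triangles.length
      (pvBuildD2 (edges0.length : Int) (triangles.length : Int) (pvEIdx edges0) triangles) ∧
    (pvBuildD2 (edges0.length : Int) (triangles.length : Int) (pvEIdx edges0) triangles).length
      = edges0.length := by
  have hnn : ∀ e, 0 ≤ (pvEIdx edges0).getD e 0 := by
    intro e
    rw [PySem.Dict.getD_eq_get?_getD]
    cases hg : (pvEIdx edges0).get? e with
    | none => simp
    | some i => simpa using (pvEIdx_get?_bound edges0 e i hg).1
  constructor
  · unfold pvBuildD2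
    apply foldl_preserve (P := Good triangles.length)
    · intro x b _ hPx
      apply foldl_preserve (P := Good triangles.length)
      · intro y e _ hPy
        by_cases hcx : (pvEIdx edges0).contains e = true
        · rw [if_pos hcx]; exact pvSet2_good hPy _ _ (hnn e)
        · rw [if_neg hcx]; exact hPy
      · exact hPx
    · have := zeros_good (edges0.length : Int) (triangles.length : Int)
      simpa using this
  · unfold pvBuildD2
    apply foldl_preserve (P := fun (M : List (List Int)) => M.length = edges0.length)
    · intro x b _ hPx
      apply foldl_preserve (P := fun (M : List (List Int)) => M.length = edges0.length)
      · intro y e _ hPy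
        by_cases hcx : (pvEIdx edges0).contains e = true
        · rw [if_pos hcx, pvSet2_length, hPy]
        · rw [if_neg hcx]; exact hPy
      · exact hPx
    · simp [pvZeros]

theorem altTriVec_testBit (eIdx : PySem.Dict (Int × Int) Int) (a b c : Int) (r : Nat) :
    ((altTriVec eIdx a b c).testBit r = true) ↔
      (∃ e ∈ pvTriEdges a b c, eIdx.contains e = true ∧ (eIdx.getD e 0).toNat = r) := by
  have hstep : ∀ (v : Nat) (e : Int × Int),
      ((if eIdx.contains e then v ||| (1 <<< (eIdx.getD e 0).toNat) else v) : Nat).testBit r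
        = (v.testBit r || (eIdx.contains e && decide ((eIdx.getD e 0).toNat = r))) := by
    intro v e
    by_cases h : eIdx.contains e = true
    · rw [if_pos h, h, Nat.testBit_or, shift_eq_pow, testBit_pow, Bool.true_and]
    · have h' : eIdx.contains e = false := by revert h; cases eIdx.contains e <;> simp
      rw [if_neg (by simp [h']), h', Bool.false_and, Bool.or_false]
  have hmem : ∀ P : Int × Int → Prop, (∃ e ∈ pvTriEdges a b c, P e) ↔
      (P (min a b, max a b) ∨ P (min a c, max a c) ∨ P (min b c, max b c)) := by
    intro P
    constructor
    · rintro ⟨e, he, hPe⟩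
      rcases List.mem_cons.mp he with rfl | he
      · exact Or.inl hPe
      rcases List.mem_cons.mp he with rfl | he
      · exact Or.inr (Or.inl hPe)
      rcases List.mem_cons.mp he with rfl | he
      · exact Or.inr (Or.inr hPe)
      cases he
    · rintro (h | h | h)
      exacts [⟨_, by simp [pvTriEdges], h⟩, ⟨_, by simp [pvTriEdges], h⟩,
        ⟨_, by simp [pvTriEdges], h⟩]
  rw [hmem]
  unfold altTriVec
  simp only [List.foldl_cons, List.foldl_nil]
  rw [hstep, hstep, hstep]
  simp only [Nat.zero_testBit, Bool.false_or, Bool.or_eq_true, Bool.and_eq_true,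
    decide_eq_true_eq]
  tauto

theorem colMask_buildD2 (edges0 : List (Int × Int)) (triangles : List (Int × Int × Int))
    (c : Nat) (hc : c < triangles.length) :
    colMask (pvBuildD2 (edges0.length : Int) (triangles.length : Int) (pvEIdx edges0) triangles) c =
      altTriVec (pvEIdx edges0) (triangles.getD c (0,0,0)).1 (triangles.getD c (0,0,0)).2.1
        (triangles.getD c (0,0,0)).2.2 := by
  apply Nat.eq_of_testBit_eq
  intro r
  rw [testBit_colMask, buildD2_entry edges0 triangles r c, Bool.eq_iff_iff,
    altTriVec_testBit (pvEIdx edges0) _ _ _ r, decide_eq_true_eq]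
  by_cases hQ : ∃ e ∈ pvTriEdges (triangles.getD c (0,0,0)).1 (triangles.getD c (0,0,0)).2.1
      (triangles.getD c (0,0,0)).2.2,
      (pvEIdx edges0).contains e = true ∧ ((pvEIdx edges0).getD e 0).toNat = r
  · rw [if_pos ⟨hc, hQ⟩]
    exact ⟨fun _ => hQ, fun _ => rfl⟩
  · rw [if_neg (fun h => hQ h.2)]
    exact ⟨fun h0 => absurd h0 (by norm_num), fun h => absurd h hQ⟩

theorem altEIdx_eq : altEIdx = pvEIdx := rfl

-- ===== VERDICT (by name: the statement is the Claim_ definition above) =====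
theorem homology_py_spec : Claim_equal_homology_py := by
  intro nV edges tris _ hpre
  unfold Spec_homology_py
  have hr1 : pvZ2Rank (pvBuildD1 nV (edges.length : Int) edges) nV (edges.length : Int)
      = altRank (edges.map (fun e => (1 <<< e.1.toNat) ||| (1 <<< e.2.toNat))) := by
    by_cases hed : edges = []
    · subst hed
      simp [pvZ2Rank, altRank]
    · obtain ⟨e0, he0⟩ := List.exists_mem_of_ne_nil edges hed
      have hnV : 1 ≤ nV := by have := hpre e0 he0; omega
      obtain ⟨hgood, hlen⟩ := buildD1_good nV edges hpre
      have h := rank_agree (pvBuildD1 nV (edges.length : Int) edges) edges.length hgood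
        (by rw [hlen]; omega)
        (fun h => hed (List.eq_nil_of_length_eq_zero h))
      rw [show ((pvBuildD1 nV (edges.length : Int) edges).length : Int) = nV by
        rw [hlen]; omega] at h
      rw [h]
      congr 1
      apply List.ext_getElem
      · simp
      · intro i h1 h2
        simp only [List.getElem_map, List.getElem_range]
        rw [colMask_buildD1 nV edges hpre i (by simpa using h1),
          List.getD_eq_getElem _ _ (by simpa using h1)]
  have hr2 : pvZ2Rank (pvBuildD2 (edges.length : Int) (tris.length : Int) (pvEIdx edges) tris)
        (edges.length : Int) (tris.length : Int)
      = altRank (tris.map (fun t => altTriVec (pvEIdx edges) t.1 t.2.1 t.2.2)) := by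
    by_cases htr : tris = []
    · subst htr
      simp [pvZ2Rank, altRank]
    · by_cases hed : edges = []
      · subst hed
        rw [altRank_zeros]
        · simp [pvZ2Rank]
        · intro v hv
          obtain ⟨t, ht, rfl⟩ := List.mem_map.mp hv
          have hemp : ∀ e : Int × Int, (pvEIdx ([] : List (Int × Int))).contains e = false := by
            intro e
            rfl
          simp [altTriVec, hemp]
      · obtain ⟨hgood, hlen⟩ := buildD2_good edges tris
        have h := rank_agree
          (pvBuildD2 (edges.length : Int) (tris.length : Int) (pvEIdx edges) tris)
          tris.length hgood
          (by rw [hlen]; intro hcon; exact hed (List.eq_nil_of_length_eq_zero hcon))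
          (fun hcon => htr (List.eq_nil_of_length_eq_zero hcon))
        rw [show ((pvBuildD2 (edges.length : Int) (tris.length : Int) (pvEIdx edges)
            tris).length : Int) = (edges.length : Int) by rw [hlen]] at h
        rw [h]
        congr 1
        apply List.ext_getElem
        · simp
        · intro i h1 h2
          simp only [List.getElem_map, List.getElem_range]
          rw [colMask_buildD2 edges tris i (by simpa using h1),
            List.getD_eq_getElem _ _ (by simpa using h1)]
  show homology_py nV edges tris = homology_py_alt nV edges tris
  simp only [homology_py, homology_py_alt, altEIdx_eq]
  rw [hr1, hr2]
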